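-- pv_equiv track=rewrite | github.com/sdhatrakjc/adventofcode | 2024/day21/solution.py | get_sequence
-- ===== SOURCE A (Python) =====
-- from collections import deque
--
-- directions = {
--     '<': (0, -1),
--     '>': (0, 1),
--     '^': (-1, 0),
--     'v': (1, 0)
-- }
--
-- def get_shortest_path(start, end, grid):
--     queue = deque([(start, '')])
--     visited = set()
--     shortest_paths = []
--     min_length = float('inf')
--
--     while queue:
--         (r, c), path = queue.popleft()
--
--         if (r, c) == end:
--             if len(path) < min_length:
--                 min_length = len(path)
--                 shortest_paths = [path + 'A']
--             elif len(path) == min_length: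
--                 shortest_paths.append(path + 'A')
--             continue
--
--         visited.add((r, c))
--
--         for dir, (dr, dc) in directions.items():
--             nr, nc = r + dr, c + dc
--
--             if  not (0 <= nr < len(grid) and 0 <= nc < len(grid[0])):
--                 continue
--
--             if (nr, nc) not in visited and grid[nr][nc] != '-':
--                 queue.append(((nr, nc), path + dir))
--
--     return shortest_paths
--
-- def get_sequence(code, grid):
--     sequences = ['']
--
--     for i in range(-1, len(code)-1):
--         if i == -1:
--             S, E = 'A', code[i + 1]
--         else:
--             S, E = code[i], code[i + 1]
--
--         start, end = (0, 0), (0, 0)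
--         for row in range(len(grid)):
--             for col in range(len(grid[0])):
--                 if grid[row][col] == S:
--                     start = row, col
--                 if grid[row][col] == E:
--                     end = row, col
--
--         paths = get_shortest_path(start, end, grid)
--         sequences = [s + path for s in sequences for path in paths]
--
--     return sequences
-- ===== SOURCE B (Python) =====
-- DELTAS = {'<': (0, -1), '>': (0, 1), '^': (-1, 0), 'v': (1, 0)}
--
-- def _all_shortest(start, end, open_cells):
--     # level-synchronous BFS over the open-cell set builds a distance map
--     dist = {start: 0}
--     frontier = [start]
--     k = 0
--     while frontier:
--         nxt = []
--         for cell in frontier: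
--             for d in '<>^v':
--                 dr, dc = DELTAS[d]
--                 n = (cell[0] + dr, cell[1] + dc)
--                 if n in open_cells and n not in dist:
--                     dist[n] = k + 1
--                     nxt.append(n)
--         frontier = nxt
--         k += 1
--     if end not in dist:
--         return []
--
--     # walk from the start, only ever stepping to cells one unit further away;
--     # directions are tried in the order <,>,^,v
--     def walk(cell, steps):
--         if steps == 0:
--             return ['A'] if cell == end else []
--         out = []
--         for d in '<>^v':
--             dr, dc = DELTAS[d]
--             n = (cell[0] + dr, cell[1] + dc)
--             if dist.get(n) == dist[cell] + 1:
--                 out.extend(d + t for t in walk(n, steps - 1))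
--         return out
--
--     return walk(start, dist[end])
--
-- def get_sequence(code, grid):
--     if not code:
--         return ['']
--     cols = len(grid[0]) if grid else 0
--     loc = {}
--     open_cells = set()
--     for r, row in enumerate(grid):
--         for c, v in enumerate(row[:cols]):
--             loc[v] = (r, c)
--             if v != '-':
--                 open_cells.add((r, c))
--     sequences = ['']
--     prev = 'A'
--     for ch in code:
--         paths = _all_shortest(loc.get(prev, (0, 0)), loc.get(ch, (0, 0)), open_cells)
--         sequences = [s + p for s in sequences for p in paths]
--         prev = ch
--     return sequences
-- ===== Notes on version B (the rewrite author's own statement) =====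
-- stated objective: alternative
-- what changed: A's FIFO BFS that enumerates whole path strings in one queue over the raw grid is replaced by a different pipeline: one enumerate pass builds a symbol-location dict and a set of open cells (replacing A's per-pair double grid rescan and per-step grid indexing), a level-synchronous BFS over that cell set builds a distance map, and a recursive walk from the start follows only distance-increasing steps in <,>,^,v priority order, reproducing A's enumeration order.
import Mathlib
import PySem

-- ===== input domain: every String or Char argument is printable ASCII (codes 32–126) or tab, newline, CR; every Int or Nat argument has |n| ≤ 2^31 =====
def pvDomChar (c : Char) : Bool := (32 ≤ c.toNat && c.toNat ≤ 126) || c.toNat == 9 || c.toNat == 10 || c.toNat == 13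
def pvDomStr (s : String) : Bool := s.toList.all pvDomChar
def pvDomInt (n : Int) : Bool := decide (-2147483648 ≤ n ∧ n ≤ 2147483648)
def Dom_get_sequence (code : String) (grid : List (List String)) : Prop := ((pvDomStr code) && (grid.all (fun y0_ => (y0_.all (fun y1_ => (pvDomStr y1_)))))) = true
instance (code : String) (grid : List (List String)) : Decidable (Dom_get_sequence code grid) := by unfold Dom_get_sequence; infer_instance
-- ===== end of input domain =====

-- B replaces A's path-enumerating FIFO BFS over the raw grid by one enumerate pass building a
-- location dict and an open-cell set, a level BFS distance map over that set, and a
-- distance-increasing walk; equal output, order included.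

-- ===== PORT A =====
def pvDirsA : List (String × Int × Int) := [("<", (0, -1)), (">", (0, 1)), ("^", (-1, 0)), ("v", (1, 0))]

-- the while-queue loop of get_shortest_path, fuelled (the fuel passed below is provably sufficient)
def gspLoop (grid : List (List String)) (endP : Int × Int) :
    Nat → List ((Int × Int) × String) → PySem.Set (Int × Int) → List String → Option Int → List String
  | 0, _, _, paths, _ => paths
  | _ + 1, [], _, paths, _ => paths
  | fuel + 1, ((r, c), path) :: rest, visited, paths, minLen =>
    if (r, c) = endP then
      match minLen with
      | none => gspLoop grid endP fuel rest visited [path ++ "A"] (some (PySem.Str.len path))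
      | some m =>
        if PySem.Str.len path < m then
          gspLoop grid endP fuel rest visited [path ++ "A"] (some (PySem.Str.len path))
        else if PySem.Str.len path = m then
          gspLoop grid endP fuel rest visited (paths ++ [path ++ "A"]) minLen
        else
          gspLoop grid endP fuel rest visited paths minLen
    else
      let visited' := PySem.Set.add visited (r, c)
      let queue' := pvDirsA.foldl (fun q d =>
        let nr := r + d.2.1
        let nc := c + d.2.2
        if 0 ≤ nr ∧ nr < (grid.length : Int) ∧ 0 ≤ nc ∧ nc < ((grid.headD []).length : Int) then
          if ¬ PySem.Set.contains visited' (nr, nc) ∧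
              PySem.List.pyGetD (PySem.List.pyGetD grid nr []) nc "" ≠ "-" then
            q ++ [((nr, nc), path ++ d.1)]
          else q
        else q) rest
      gspLoop grid endP fuel queue' visited' paths minLen

def get_shortest_path (start endP : Int × Int) (grid : List (List String)) : List String :=
  gspLoop grid endP (4 ^ (grid.length * (grid.headD []).length + 2) + 1) [(start, "")] PySem.Set.empty [] none

def get_sequence (code : String) (grid : List (List String)) : List String :=
  (PySem.List.pyRange (-1) (PySem.Str.len code - 1) 1).foldl (fun sequences i =>
    -- code[i] / code[i+1] are always in range along this loop, so the .getD defaults are dead code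
    let S : String := if i = -1 then "A" else ((PySem.Str.pyGet? code i).map (String.mk [·])).getD ""
    let E : String := ((PySem.Str.pyGet? code (i + 1)).map (String.mk [·])).getD ""
    let se := (PySem.List.pyRange 0 (grid.length : Int) 1).foldl (fun se row =>
      (PySem.List.pyRange 0 ((grid.headD []).length : Int) 1).foldl (fun se col =>
        let v := PySem.List.pyGetD (PySem.List.pyGetD grid row []) col ""
        ((if v = S then (row, col) else se.1), (if v = E then (row, col) else se.2))) se)
      (((0 : Int), (0 : Int)), ((0 : Int), (0 : Int)))
    let paths := get_shortest_path se.1 se.2 grid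
    sequences.flatMap (fun s => paths.map (fun path => s ++ path))) [""]

-- ===== PORT B =====
def pvDirChars : List Char := ['<', '>', '^', 'v']

def pvDelta : Char → Int × Int
  | '<' => (0, -1)
  | '>' => (0, 1)
  | '^' => (-1, 0)
  | _ => (1, 0)

-- the while-frontier level loop of _all_shortest, fuelled (the fuel passed below is sufficient:
-- each level beyond the first inserts at least one member of `cells` into the distance map)
def bfsLevelsB (cells : PySem.Set (Int × Int)) :
    Nat → PySem.Dict (Int × Int) Int → List (Int × Int) → Int → PySem.Dict (Int × Int) Int
  | 0, dist, _, _ => dist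
  | _ + 1, dist, [], _ => dist
  | fuel + 1, dist, x :: frontier, k =>
    let st := (x :: frontier).foldl (fun st cell =>
      pvDirChars.foldl (fun (st : PySem.Dict (Int × Int) Int × List (Int × Int)) d =>
        let n : Int × Int := (cell.1 + (pvDelta d).1, cell.2 + (pvDelta d).2)
        if PySem.Set.contains cells n = true ∧ ¬ (PySem.Dict.contains st.1 n = true) then
          (st.1.insert n (k + 1), st.2 ++ [n])
        else st) st) (dist, ([] : List (Int × Int)))
    bfsLevelsB cells fuel st.1 st.2 (k + 1)

def pvWalk (dist : PySem.Dict (Int × Int) Int) (endP : Int × Int) :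
    Nat → (Int × Int) → List String
  | 0, cell => if cell = endP then ["A"] else []
  | steps + 1, cell =>
    pvDirChars.foldl (fun out d =>
      let n : Int × Int := (cell.1 + (pvDelta d).1, cell.2 + (pvDelta d).2)
      if PySem.Dict.get? dist n = some (PySem.Dict.getD dist cell 0 + 1) then
        out ++ (pvWalk dist endP steps n).map (fun t => String.mk [d] ++ t)
      else out) []

def pvAllShortest (start endP : Int × Int) (cells : PySem.Set (Int × Int)) : List String :=
  let dist := bfsLevelsB cells (cells.length + 2)
      ((PySem.Dict.empty : PySem.Dict (Int × Int) Int).insert start 0) [start] 0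
  if PySem.Dict.contains dist endP then
    -- dist[end] is a nonnegative Int, so .toNat is exact
    pvWalk dist endP (PySem.Dict.getD dist endP 0).toNat start
  else []

def get_sequence_alt (code : String) (grid : List (List String)) : List String :=
  if code = "" then [""]
  else
    let cols : Int := if grid = [] then 0 else ((grid.headD []).length : Int)
    let lc := (PySem.List.enumerate grid).foldl
      (fun (lc : PySem.Dict String (Int × Int) × PySem.Set (Int × Int)) rrow =>
        (PySem.List.enumerate (PySem.List.slice rrow.2 none (some cols))).foldl
          (fun lc cv =>
            (lc.1.insert cv.2 (rrow.1, cv.1),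
             if cv.2 ≠ "-" then PySem.Set.add lc.2 (rrow.1, cv.1) else lc.2)) lc)
      (PySem.Dict.empty, PySem.Set.empty)
    (code.toList.foldl (fun (st : List String × String) ch =>
        let paths := pvAllShortest (lc.1.getD st.2 (0, 0)) (lc.1.getD (String.mk [ch]) (0, 0)) lc.2
        (st.1.flatMap (fun s => paths.map (fun p => s ++ p)), String.mk [ch])) ([""], "A")).1

-- ===== PRECONDITION & SPEC =====
-- Pre_ excludes exactly the inputs where Python A raises IndexError: with a nonempty code it
-- indexes every row at all columns of row 0, so some row shorter than row 0 raises.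
def Pre_get_sequence (code : String) (grid : List (List String)) : Prop :=
  code = "" ∨ ∀ row ∈ grid, (grid.headD []).length ≤ row.length
instance (code : String) (grid : List (List String)) : Decidable (Pre_get_sequence code grid) := by
  unfold Pre_get_sequence; infer_instance

def pvWitness_get_sequence : String × List (List String) := ("12", [["1", "2"], ["A", "x"]])

def Spec_get_sequence (code : String) (grid : List (List String)) (out : List String) : Prop :=
  out = get_sequence_alt code grid
instance (code : String) (grid : List (List String)) (out : List String) :
    Decidable (Spec_get_sequence code grid out) := by unfold Spec_get_sequence; infer_instance

-- ===== CLAIM (what is proved, stated in full; the proofs are below) =====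
def Claim_equal_get_sequence : Prop := ∀ (code : String) (grid : List (List String)),
  Dom_get_sequence code grid → Pre_get_sequence code grid →
  Spec_get_sequence code grid (get_sequence code grid)

-- ===== LEMMAS AND PROOFS =====

-- ---------- basic geometry ----------
def pvCols (g : List (List String)) : Nat := (g.headD []).length
def pvCell (g : List (List String)) (p : Int × Int) : String :=
  PySem.List.pyGetD (PySem.List.pyGetD g p.1 []) p.2 ""
def pvOk (g : List (List String)) (p : Int × Int) : Bool :=
  decide (0 ≤ p.1 ∧ p.1 < (g.length : Int) ∧ 0 ≤ p.2 ∧ p.2 < ((pvCols g : Nat) : Int) ∧ pvCell g p ≠ "-")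
def pvStep (p : Int × Int) (d : String × Int × Int) : Int × Int := (p.1 + d.2.1, p.2 + d.2.2)
def pvTrace (p : Int × Int) (ds : List (String × Int × Int)) : Int × Int := ds.foldl pvStep p
def pvValid (g : List (List String)) : (Int × Int) → List (String × Int × Int) → Bool
  | _, [] => true
  | p, d :: ds => pvOk g (pvStep p d) && pvValid g (pvStep p d) ds
def pvStr : List (String × Int × Int) → String
  | [] => ""
  | d :: ds => d.1 ++ pvStr ds
def pvAllP : Nat → List (List (String × Int × Int))
  | 0 => [[]]
  | n + 1 => pvDirsA.flatMap (fun d => (pvAllP n).map (d :: ·))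
def pvReach (g : List (List String)) (s X : Int × Int) (k : Nat) : Bool :=
  (pvAllP k).any (fun ds => pvValid g s ds && (pvTrace s ds == X))
def pvRC (g : List (List String)) : Nat := g.length * pvCols g
def pvMdist (g : List (List String)) (s X : Int × Int) : Option Nat :=
  (List.range (pvRC g + 2)).find? (pvReach g s X)
def pvCellsA (s : Int × Int) : List (String × Int × Int) → List (Int × Int)
  | [] => []
  | d :: ds => pvStep s d :: pvCellsA (pvStep s d) ds

-- ---------- path basics ----------
lemma pvTrace_nil (s : Int × Int) : pvTrace s [] = s := rfl
lemma pvTrace_cons (s : Int × Int) (d : String × Int × Int) (ds : List (String × Int × Int)) :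
    pvTrace s (d :: ds) = pvTrace (pvStep s d) ds := rfl
lemma pvTrace_append (s : Int × Int) (ds es : List (String × Int × Int)) :
    pvTrace s (ds ++ es) = pvTrace (pvTrace s ds) es := List.foldl_append
lemma pvValid_append (g : List (List String)) (s : Int × Int) (ds es : List (String × Int × Int)) :
    pvValid g s (ds ++ es) = (pvValid g s ds && pvValid g (pvTrace s ds) es) := by
  induction ds generalizing s with
  | nil => simp [pvValid, pvTrace_nil]
  | cons d ds ih => simp [pvValid, ih, pvTrace_cons, Bool.and_assoc]
lemma pvStr_append (ds es : List (String × Int × Int)) :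
    pvStr (ds ++ es) = pvStr ds ++ pvStr es := by
  induction ds with
  | nil => simp [pvStr]
  | cons d ds ih => simp [pvStr, ih, String.append_assoc]
lemma pvCellsA_append (s : Int × Int) (ds es : List (String × Int × Int)) :
    pvCellsA s (ds ++ es) = pvCellsA s ds ++ pvCellsA (pvTrace s ds) es := by
  induction ds generalizing s with
  | nil => simp [pvCellsA, pvTrace_nil]
  | cons d ds ih => simp [pvCellsA, ih, pvTrace_cons]
lemma pvCellsA_length (s : Int × Int) (ds : List (String × Int × Int)) :
    (pvCellsA s ds).length = ds.length := by
  induction ds generalizing s with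
  | nil => rfl
  | cons d ds ih => simp [pvCellsA, ih]
lemma pvCellsA_ok (g : List (List String)) (s : Int × Int) (ds : List (String × Int × Int))
    (h : pvValid g s ds = true) : ∀ x ∈ pvCellsA s ds, pvOk g x = true := by
  induction ds generalizing s with
  | nil => simp [pvCellsA]
  | cons d ds ih =>
      simp only [pvValid, Bool.and_eq_true] at h
      simp only [pvCellsA, List.mem_cons]
      rintro x (rfl | hx)
      · exact h.1
      · exact ih _ h.2 x hx
lemma pvCellsA_getElem (s : Int × Int) (ds : List (String × Int × Int)) (i : Nat)
    (hi : i < (pvCellsA s ds).length) :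
    (pvCellsA s ds)[i] = pvTrace s (ds.take (i + 1)) := by
  induction ds generalizing s i with
  | nil => simp [pvCellsA] at hi
  | cons d ds ih =>
      cases i with
      | zero => simp [pvCellsA, pvTrace_cons, pvTrace_nil, List.take]
      | succ i =>
          simp only [pvCellsA, List.getElem_cons_succ, List.take_succ_cons, pvTrace_cons]
          exact ih (pvStep s d) i (by simpa [pvCellsA] using hi)
-- ---------- pvAllP ----------
lemma mem_pvAllP {ds : List (String × Int × Int)} {k : Nat} :
    ds ∈ pvAllP k ↔ ds.length = k ∧ ∀ d ∈ ds, d ∈ pvDirsA := by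
  induction k generalizing ds with
  | zero =>
      constructor
      · intro h; simp only [pvAllP, List.mem_singleton] at h; subst h; simp
      · rintro ⟨hl, _⟩
        simp [pvAllP, List.length_eq_zero_iff.mp hl]
  | succ k ih =>
      constructor
      · intro h
        simp only [pvAllP, List.mem_flatMap, List.mem_map] at h
        obtain ⟨d, hd, ds', hds', rfl⟩ := h
        obtain ⟨hl, hall⟩ := ih.mp hds'
        refine ⟨by simp [hl], ?_⟩
        intro e he
        rcases List.mem_cons.mp he with rfl | he
        · exact hd
        · exact hall e he
      · rintro ⟨hl, hall⟩
        cases ds with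
        | nil => simp at hl
        | cons d ds' =>
            simp only [pvAllP, List.mem_flatMap, List.mem_map]
            exact ⟨d, hall d (by simp), ds',
              ih.mpr ⟨by simpa using hl, fun e he => hall e (by simp [he])⟩, rfl⟩
lemma pvAllP_back (k : Nat) :
    pvAllP (k + 1) = (pvAllP k).flatMap (fun ds => pvDirsA.map (fun d => ds ++ [d])) := by
  induction k with
  | zero => rfl
  | succ k ih =>
      conv_lhs => rw [show pvAllP (k + 1 + 1) = pvDirsA.flatMap (fun d => (pvAllP (k + 1)).map (d :: ·)) from rfl, ih]
      conv_rhs => rw [show pvAllP (k + 1) = pvDirsA.flatMap (fun d => (pvAllP k).map (d :: ·)) from rfl]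
      simp [List.map_flatMap, List.flatMap_map, List.map_map, List.flatMap_assoc, Function.comp_def]

-- ---------- reach ----------
lemma pvReach_iff {g : List (List String)} {s X : Int × Int} {k : Nat} :
    pvReach g s X k = true ↔ ∃ ds ∈ pvAllP k, pvValid g s ds = true ∧ pvTrace s ds = X := by
  simp [pvReach, List.any_eq_true]
lemma pvReach_zero {g : List (List String)} {s X : Int × Int} :
    pvReach g s X 0 = true ↔ s = X := by
  simp [pvReach, pvAllP, pvValid, pvTrace_nil]
lemma pvReach_succ_iff {g : List (List String)} {s X : Int × Int} {k : Nat} :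
    pvReach g s X (k + 1) = true ↔
      ∃ Y d, pvReach g s Y k = true ∧ d ∈ pvDirsA ∧ pvStep Y d = X ∧ pvOk g X = true := by
  constructor
  · intro h
    obtain ⟨ds, hds, hv, ht⟩ := pvReach_iff.mp h
    rw [pvAllP_back] at hds
    simp only [List.mem_flatMap, List.mem_map] at hds
    obtain ⟨ds', hds', d, hd, rfl⟩ := hds
    rw [pvValid_append] at hv
    simp only [Bool.and_eq_true] at hv
    have hv2 := hv.2
    simp only [pvValid, Bool.and_eq_true] at hv2
    rw [pvTrace_append] at ht
    simp only [pvTrace_cons, pvTrace_nil] at ht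
    exact ⟨pvTrace s ds', d, pvReach_iff.mpr ⟨ds', hds', hv.1, rfl⟩, hd, ht, ht ▸ hv2.1⟩
  · rintro ⟨Y, d, hr, hd, hstep, hok⟩
    obtain ⟨ds, hds, hv, ht⟩ := pvReach_iff.mp hr
    refine pvReach_iff.mpr ⟨ds ++ [d], ?_, ?_, ?_⟩
    · rw [pvAllP_back]
      simp only [List.mem_flatMap, List.mem_map]
      exact ⟨ds, hds, d, hd, rfl⟩
    · rw [pvValid_append]
      simp only [Bool.and_eq_true]
      refine ⟨hv, ?_⟩
      simp only [pvValid, Bool.and_eq_true]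
      rw [ht, hstep]
      exact ⟨hok, trivial⟩
    · rw [pvTrace_append, ht]
      simpa [pvTrace_cons, pvTrace_nil] using hstep
lemma pvOk_of_reach_succ {g : List (List String)} {s X : Int × Int} {k : Nat}
    (h : pvReach g s X (k + 1) = true) : pvOk g X = true := by
  obtain ⟨_, _, _, _, _, hok⟩ := pvReach_succ_iff.mp h
  exact hok
lemma pvReach_step {g : List (List String)} {s Y : Int × Int} {k : Nat}
    (h : pvReach g s Y k = true) {d : String × Int × Int} (hd : d ∈ pvDirsA)
    (hok : pvOk g (pvStep Y d) = true) : pvReach g s (pvStep Y d) (k + 1) = true :=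
  pvReach_succ_iff.mpr ⟨Y, d, h, hd, rfl, hok⟩

-- ---------- pigeonhole / shortening ----------
lemma pvEnc_lt {g : List (List String)} {x : Int × Int} (h : pvOk g x = true) :
    x.1.toNat * pvCols g + x.2.toNat < pvRC g := by
  simp only [pvOk, decide_eq_true_eq] at h
  obtain ⟨h1, h2, h3, h4, -⟩ := h
  have hr : x.1.toNat < g.length := by omega
  have hc : x.2.toNat < pvCols g := by omega
  calc x.1.toNat * pvCols g + x.2.toNat < x.1.toNat * pvCols g + pvCols g := by omega
    _ = (x.1.toNat + 1) * pvCols g := by ring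
    _ ≤ g.length * pvCols g := Nat.mul_le_mul_right _ (by omega)
lemma pvNodup_length_le {g : List (List String)} {l : List (Int × Int)}
    (hok : ∀ x ∈ l, pvOk g x = true) (hnd : l.Nodup) : l.length ≤ pvRC g := by
  have hinj : ∀ x ∈ l, ∀ y ∈ l,
      x.1.toNat * pvCols g + x.2.toNat = y.1.toNat * pvCols g + y.2.toNat → x = y := by
    intro x hx y hy hxy
    have hx' := hok x hx; have hy' := hok y hy
    simp only [pvOk, decide_eq_true_eq] at hx' hy'
    have hcx : x.2.toNat < pvCols g := by omega
    have hcy : y.2.toNat < pvCols g := by omega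
    have hC : 0 < pvCols g := by omega
    have d1 : (x.1.toNat * pvCols g + x.2.toNat) / pvCols g = x.1.toNat := by
      rw [mul_comm, Nat.mul_add_div hC, Nat.div_eq_of_lt hcx]; omega
    have d2 : (y.1.toNat * pvCols g + y.2.toNat) / pvCols g = y.1.toNat := by
      rw [mul_comm, Nat.mul_add_div hC, Nat.div_eq_of_lt hcy]; omega
    rw [hxy, d2] at d1
    rw [d1] at hxy
    have e2 : x.2.toNat = y.2.toNat := by omega
    have p1 : x.1 = y.1 := by omega
    have p2 : x.2 = y.2 := by omega
    exact Prod.ext p1 p2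
  have hnd' : (l.map (fun x : Int × Int => x.1.toNat * pvCols g + x.2.toNat)).Nodup :=
    List.Nodup.map_on hinj hnd
  have hsub : (l.map (fun x : Int × Int => x.1.toNat * pvCols g + x.2.toNat)).toFinset ⊆
      Finset.range (pvRC g) := by
    intro a ha
    simp only [List.mem_toFinset, List.mem_map] at ha
    obtain ⟨x, hx, rfl⟩ := ha
    exact Finset.mem_range.mpr (pvEnc_lt (hok x hx))
  calc l.length = (l.map (fun x : Int × Int => x.1.toNat * pvCols g + x.2.toNat)).length := by simp
    _ = (l.map _).toFinset.card := (List.toFinset_card_of_nodup hnd').symm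
    _ ≤ (Finset.range (pvRC g)).card := Finset.card_le_card hsub
    _ = pvRC g := Finset.card_range _
lemma pvShorten {g : List (List String)} {s X : Int × Int} {ds : List (String × Int × Int)}
    (hv : pvValid g s ds = true) (ht : pvTrace s ds = X)
    (hnd : ¬ (pvCellsA s ds).Nodup) :
    ∃ es, es.length < ds.length ∧ pvValid g s es = true ∧ pvTrace s es = X ∧
      (∀ d ∈ es, d ∈ ds) := by
  rw [List.nodup_iff_getElem?_ne_getElem?] at hnd
  simp only [not_forall, not_not, exists_prop] at hnd
  obtain ⟨i, j, hij, hjl, heq⟩ := hnd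
  rw [pvCellsA_length] at hjl
  have hil : i < ds.length := lt_trans hij hjl
  have h1 : pvTrace s (ds.take (i + 1)) = pvTrace s (ds.take (j + 1)) := by
    have e1 := pvCellsA_getElem s ds i (by rw [pvCellsA_length]; exact hil)
    have e2 := pvCellsA_getElem s ds j (by rw [pvCellsA_length]; exact hjl)
    rw [List.getElem?_eq_getElem (by rw [pvCellsA_length]; exact hil),
        List.getElem?_eq_getElem (by rw [pvCellsA_length]; exact hjl)] at heq
    rw [← e1, ← e2]
    exact Option.some.inj heq
  refine ⟨ds.take (i + 1) ++ ds.drop (j + 1), ?_, ?_, ?_, ?_⟩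
  · have : (ds.take (i + 1)).length = i + 1 := List.length_take_of_le (by omega)
    have : (ds.drop (j + 1)).length = ds.length - (j + 1) := List.length_drop ..
    simp only [List.length_append]
    omega
  · have hsplit : ds = ds.take (j + 1) ++ ds.drop (j + 1) := (List.take_append_drop _ _).symm
    have hv' : pvValid g s (ds.take (j + 1) ++ ds.drop (j + 1)) = true := by rw [← hsplit]; exact hv
    rw [pvValid_append, Bool.and_eq_true] at hv'
    have hpre : pvValid g s (ds.take (i + 1)) = true := by
      have : ds.take (i + 1) = (ds.take (j + 1)).take (i + 1) := by
        rw [List.take_take]; congr 1; omega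
      rw [this]
      have h2 : pvValid g s ((ds.take (j+1)).take (i+1) ++ (ds.take (j+1)).drop (i+1)) = true := by
        rw [List.take_append_drop]; exact hv'.1
      rw [pvValid_append, Bool.and_eq_true] at h2
      exact h2.1
    rw [pvValid_append, Bool.and_eq_true]
    exact ⟨hpre, h1 ▸ hv'.2⟩
  · rw [pvTrace_append, h1, ← pvTrace_append, List.take_append_drop]
    exact ht
  · intro d hd
    rcases List.mem_append.mp hd with h | h
    · exact List.mem_of_mem_take h
    · exact List.mem_of_mem_drop h
lemma pvReach_short {g : List (List String)} {s X : Int × Int} {k : Nat}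
    (h : pvReach g s X k = true) : ∃ j, j ≤ k ∧ j ≤ pvRC g ∧ pvReach g s X j = true := by
  induction k using Nat.strong_induction_on with
  | _ k ih =>
    obtain ⟨ds, hds, hv, ht⟩ := pvReach_iff.mp h
    obtain ⟨hlen, hdirs⟩ := mem_pvAllP.mp hds
    by_cases hnd : (pvCellsA s ds).Nodup
    · have hle : ds.length ≤ pvRC g := by
        have := pvNodup_length_le (g := g) (pvCellsA_ok g s ds hv) hnd
        rwa [pvCellsA_length] at this
      exact ⟨k, le_refl _, hlen ▸ hle, h⟩
    · obtain ⟨es, hlt, hv', ht', hsub⟩ := pvShorten hv ht hnd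
      have hes : es ∈ pvAllP es.length := mem_pvAllP.mpr ⟨rfl, fun d hd => hdirs d (hsub d hd)⟩
      have hr' : pvReach g s X es.length = true := pvReach_iff.mpr ⟨es, hes, hv', ht'⟩
      obtain ⟨j, hj1, hj2, hj3⟩ := ih es.length (by omega) hr'
      exact ⟨j, by omega, hj2, hj3⟩

-- ---------- mdist ----------
lemma pvFind?_range'_first {p : Nat → Bool} :
    ∀ (n a k : Nat), (List.range' a n).find? p = some k →
      p k = true ∧ a ≤ k ∧ k < a + n ∧ ∀ j, a ≤ j → j < k → p j = false := by
  intro n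
  induction n with
  | zero => intro a k h; simp at h
  | succ n ih =>
      intro a k h
      rw [List.range'_succ, List.find?_cons] at h
      by_cases hpa : p a = true
      · rw [hpa] at h
        simp only [Option.some.injEq] at h
        subst h
        exact ⟨hpa, le_refl _, by omega, fun j h1 h2 => by omega⟩
      · rw [Bool.not_eq_true] at hpa
        rw [hpa] at h
        obtain ⟨h1, h2, h3, h4⟩ := ih (a + 1) k h
        refine ⟨h1, by omega, by omega, fun j hj1 hj2 => ?_⟩
        rcases Nat.eq_or_lt_of_le hj1 with rfl | hlt
        · exact hpa
        · exact h4 j hlt hj2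
lemma pvMdist_spec {g : List (List String)} {s X : Int × Int} {k : Nat}
    (h : pvMdist g s X = some k) :
    pvReach g s X k = true ∧ k < pvRC g + 2 ∧ ∀ j, j < k → pvReach g s X j = false := by
  unfold pvMdist at h
  rw [List.range_eq_range'] at h
  obtain ⟨h1, h2, h3, h4⟩ := pvFind?_range'_first _ _ _ h
  exact ⟨h1, by omega, fun j hj => h4 j (by omega) hj⟩
lemma pvMdist_of_reach {g : List (List String)} {s X : Int × Int} {k : Nat}
    (h : pvReach g s X k = true) :
    ∃ j, pvMdist g s X = some j ∧ j ≤ k ∧ j ≤ pvRC g := by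
  obtain ⟨j0, hj0k, hj0rc, hr0⟩ := pvReach_short h
  cases hm : pvMdist g s X with
  | none =>
      exfalso
      unfold pvMdist at hm
      rw [List.find?_eq_none] at hm
      exact absurd hr0 (by simpa using hm j0 (by simp; omega))
  | some j =>
      obtain ⟨hr, _, hmin⟩ := pvMdist_spec hm
      refine ⟨j, rfl, ?_, ?_⟩
      · by_contra hc
        exact absurd hr0 (by simp [hmin j0 (by omega)])
      · by_contra hc
        exact absurd hr0 (by simp [hmin j0 (by omega)])
lemma pvMdist_le_RC {g : List (List String)} {s X : Int × Int} {k : Nat}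
    (h : pvMdist g s X = some k) : k ≤ pvRC g := by
  obtain ⟨hr, _, _⟩ := pvMdist_spec h
  obtain ⟨j, hj, _, hjrc⟩ := pvMdist_of_reach hr
  rw [h] at hj
  have := Option.some.inj hj
  omega
lemma pvMdist_none_iff {g : List (List String)} {s X : Int × Int} :
    pvMdist g s X = none ↔ ∀ k, pvReach g s X k = false := by
  constructor
  · intro h k
    by_contra hc
    rw [Bool.not_eq_false] at hc
    obtain ⟨j, hj, _, _⟩ := pvMdist_of_reach hc
    rw [h] at hj
    simp at hj
  · intro h
    unfold pvMdist
    rw [List.find?_eq_none]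
    intro j _
    simp [h j]
lemma pvMdist_start (g : List (List String)) (s : Int × Int) : pvMdist g s s = some 0 := by
  obtain ⟨j, hj, hjk, _⟩ := pvMdist_of_reach (pvReach_zero.mpr (rfl : s = s))
  have : j = 0 := Nat.le_zero.mp hjk
  rw [this] at hj
  exact hj
lemma pvMdist_zero {g : List (List String)} {s X : Int × Int}
    (h : pvMdist g s X = some 0) : X = s := by
  obtain ⟨hr, _, _⟩ := pvMdist_spec h
  exact (pvReach_zero.mp hr).symm
lemma pvMdist_step_le {g : List (List String)} {s Y : Int × Int} {k : Nat}
    (h : pvMdist g s Y = some k) {d : String × Int × Int} (hd : d ∈ pvDirsA)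
    (hok : pvOk g (pvStep Y d) = true) :
    ∃ j, pvMdist g s (pvStep Y d) = some j ∧ j ≤ k + 1 := by
  obtain ⟨hr, _, _⟩ := pvMdist_spec h
  obtain ⟨j, hj, hjk, _⟩ := pvMdist_of_reach (pvReach_step hr hd hok)
  exact ⟨j, hj, hjk⟩
lemma pvOk_of_mdist_succ {g : List (List String)} {s X : Int × Int} {k : Nat}
    (h : pvMdist g s X = some (k + 1)) : pvOk g X = true :=
  pvOk_of_reach_succ (pvMdist_spec h).1
lemma pvMdist_pred {g : List (List String)} {s X : Int × Int} {k : Nat}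
    (h : pvMdist g s X = some (k + 1)) :
    ∃ Y d, d ∈ pvDirsA ∧ pvStep Y d = X ∧ pvMdist g s Y = some k := by
  obtain ⟨hr, _, hmin⟩ := pvMdist_spec h
  obtain ⟨Y, d, hrY, hd, hstep, hok⟩ := pvReach_succ_iff.mp hr
  obtain ⟨j, hj, hjk, _⟩ := pvMdist_of_reach hrY
  rcases Nat.lt_or_ge j k with hlt | hge
  · exfalso
    have hstep' : pvReach g s (pvStep Y d) (j + 1) = true :=
      pvReach_step (pvMdist_spec hj).1 hd (by rw [hstep]; exact hok)
    rw [hstep] at hstep'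
    exact absurd hstep' (by simp [hmin (j + 1) (by omega)])
  · have : j = k := le_antisymm hjk hge
    exact ⟨Y, d, hd, hstep, this ▸ hj⟩

-- ---------- B side: the level BFS over the open-cell set builds exactly pvMdist ----------
lemma pvDirsA_eq_map : pvDirsA = pvDirChars.map (fun d => (String.mk [d], pvDelta d)) := by decide

-- one direction step of B's level BFS, phrased over pvDirsA triples
def pvBStep (cells : PySem.Set (Int × Int)) (k : Int) (cell : Int × Int)
    (st : PySem.Dict (Int × Int) Int × List (Int × Int)) (t : String × Int × Int) :
    PySem.Dict (Int × Int) Int × List (Int × Int) :=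
  if PySem.Set.contains cells (pvStep cell t) = true ∧
      ¬ (PySem.Dict.contains st.1 (pvStep cell t) = true) then
    (st.1.insert (pvStep cell t) (k + 1), st.2 ++ [pvStep cell t])
  else st

lemma pvCharFold_eq (cells : PySem.Set (Int × Int)) (k : Int) (cell : Int × Int)
    (st : PySem.Dict (Int × Int) Int × List (Int × Int)) :
    pvDirChars.foldl (fun (st : PySem.Dict (Int × Int) Int × List (Int × Int)) d =>
      let n : Int × Int := (cell.1 + (pvDelta d).1, cell.2 + (pvDelta d).2)
      if PySem.Set.contains cells n = true ∧ ¬ (PySem.Dict.contains st.1 n = true) then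
        (st.1.insert n (k + 1), st.2 ++ [n])
      else st) st
    = pvDirsA.foldl (pvBStep cells k cell) st := by
  rw [pvDirsA_eq_map, List.foldl_map]
  rfl

lemma bfsLevelsB_step (cells : PySem.Set (Int × Int)) (fuel : Nat)
    (dist : PySem.Dict (Int × Int) Int) (x : Int × Int) (fr : List (Int × Int)) (k : Int) :
    bfsLevelsB cells (fuel + 1) dist (x :: fr) k =
      bfsLevelsB cells fuel
        ((x :: fr).foldl (fun st X => pvDirsA.foldl (pvBStep cells k X) st) (dist, [])).1
        ((x :: fr).foldl (fun st X => pvDirsA.foldl (pvBStep cells k X) st) (dist, [])).2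
        (k + 1) := by
  have h : (x :: fr).foldl (fun st cell =>
      pvDirChars.foldl (fun (st : PySem.Dict (Int × Int) Int × List (Int × Int)) d =>
        let n : Int × Int := (cell.1 + (pvDelta d).1, cell.2 + (pvDelta d).2)
        if PySem.Set.contains cells n = true ∧ ¬ (PySem.Dict.contains st.1 n = true) then
          (st.1.insert n (k + 1), st.2 ++ [n])
        else st) st) (dist, ([] : List (Int × Int)))
      = (x :: fr).foldl (fun st X => pvDirsA.foldl (pvBStep cells k X) st) (dist, []) := by
    apply PySem.List.foldl_congr_mem
    intro st X _
    exact pvCharFold_eq cells k X st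
  show bfsLevelsB cells fuel _ _ (k + 1) = _
  rw [h]

-- a shortest distance is at most the number of open cells
lemma pvMdist_le_size {g : List (List String)} {cells : PySem.Set (Int × Int)}
    (hcc : ∀ n : Int × Int, PySem.Set.contains cells n = true ↔ pvOk g n = true)
    {s X : Int × Int} {k : Nat}
    (h : pvMdist g s X = some k) : k ≤ cells.length := by
  obtain ⟨hr, _, hmin⟩ := pvMdist_spec h
  obtain ⟨ds, hds, hv, ht⟩ := pvReach_iff.mp hr
  obtain ⟨hlen, hdirs⟩ := mem_pvAllP.mp hds
  by_cases hnd' : (pvCellsA s ds).Nodup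
  · have hsub : pvCellsA s ds ⊆ cells := by
      intro x hx
      exact (PySem.Set.contains_iff cells x).mp ((hcc x).mpr (pvCellsA_ok g s ds hv x hx))
    calc k = (pvCellsA s ds).length := by rw [pvCellsA_length, hlen]
      _ = (pvCellsA s ds).toFinset.card := (List.toFinset_card_of_nodup hnd').symm
      _ ≤ cells.toFinset.card := Finset.card_le_card (fun a ha => by
          rw [List.mem_toFinset] at ha ⊢
          exact hsub ha)
      _ ≤ cells.length := List.toFinset_card_le _
  · exfalso
    obtain ⟨es, hlt, hv', ht', hsub⟩ := pvShorten hv ht hnd'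
    have hes : es ∈ pvAllP es.length := mem_pvAllP.mpr ⟨rfl, fun d hd => hdirs d (hsub d hd)⟩
    have : pvReach g s X es.length = true := pvReach_iff.mpr ⟨es, hes, hv', ht'⟩
    rw [hmin es.length (by omega)] at this
    exact Bool.false_ne_true this

-- mid-level invariants
def pvBM1 (g : List (List String)) (s : Int × Int) (k : Nat)
    (st : PySem.Dict (Int × Int) Int × List (Int × Int)) : Prop :=
  ∀ X v, st.1.get? X = some v ↔
    ((∃ j, j ≤ k ∧ pvMdist g s X = some j ∧ v = (j : Int)) ∨ (X ∈ st.2 ∧ v = ((k : Int) + 1)))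
def pvBM2 (g : List (List String)) (s : Int × Int) (k : Nat)
    (st : PySem.Dict (Int × Int) Int × List (Int × Int)) : Prop :=
  ∀ X ∈ st.2, pvMdist g s X = some (k + 1)

lemma pvBStep_spec {g : List (List String)} {cells : PySem.Set (Int × Int)}
    (hcc : ∀ n : Int × Int, PySem.Set.contains cells n = true ↔ pvOk g n = true)
    {s Y : Int × Int} {k : Nat} (hY : pvMdist g s Y = some k)
    {st : PySem.Dict (Int × Int) Int × List (Int × Int)}
    (h1 : pvBM1 g s k st) (h2 : pvBM2 g s k st) {d : String × Int × Int} (hd : d ∈ pvDirsA) :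
    pvBM1 g s k (pvBStep cells (k : Int) Y st d) ∧
    pvBM2 g s k (pvBStep cells (k : Int) Y st d) ∧
    (∀ x ∈ st.2, x ∈ (pvBStep cells (k : Int) Y st d).2) ∧
    (pvMdist g s (pvStep Y d) = some (k + 1) → pvStep Y d ∈ (pvBStep cells (k : Int) Y st d).2) := by
  classical
  set N : Int × Int := pvStep Y d with hN
  unfold pvBStep
  rw [← hN]
  by_cases hc : (PySem.Set.contains cells N = true ∧ ¬ (PySem.Dict.contains st.1 N = true))
  · have hok : pvOk g N = true := (hcc N).mp hc.1
    have hfresh : st.1.get? N = none := by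
      rcases h : st.1.get? N with _ | v
      · rfl
      · exfalso
        apply hc.2
        rw [PySem.Dict.contains_eq_isSome_get?, h]
        rfl
    have hmN : pvMdist g s N = some (k + 1) := by
      have hr : pvReach g s N (k + 1) := by
        have := pvReach_step (pvMdist_spec hY).1 hd (by rw [← hN]; exact hok)
        rwa [← hN] at this
      obtain ⟨j, hj, hjk, _⟩ := pvMdist_of_reach hr
      rcases Nat.lt_or_ge j (k + 1) with hlt | hge
      · exfalso
        have : st.1.get? N = some (j : Int) := (h1 N (j : Int)).mpr (Or.inl ⟨j, by omega, hj, rfl⟩)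
        rw [hfresh] at this
        simp at this
      · have : j = k + 1 := by omega
        rw [this] at hj
        exact hj
    rw [if_pos hc]
    refine ⟨?_, ?_, ?_, ?_⟩
    · intro X v
      rw [PySem.Dict.get?_insert]
      by_cases hX : X = N
      · subst hX
        simp only [if_pos rfl]
        simp only [List.mem_append, List.mem_singleton]
        constructor
        · intro h
          exact Or.inr ⟨Or.inr (by simp), (Option.some.inj h).symm⟩
        · rintro (⟨j, hjk, hj, rfl⟩ | ⟨_, rfl⟩)
          · rw [hmN] at hj
            have := Option.some.inj hj
            omega
          · rfl
      · rw [if_neg hX, h1 X v]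
        constructor
        · rintro (h | ⟨hm, rfl⟩)
          · exact Or.inl h
          · exact Or.inr ⟨by simp [hm], rfl⟩
        · rintro (h | ⟨hm, rfl⟩)
          · exact Or.inl h
          · rcases List.mem_append.mp hm with h' | h'
            · exact Or.inr ⟨h', rfl⟩
            · exact absurd (List.mem_singleton.mp h') hX
    · intro X hX
      rcases List.mem_append.mp hX with h' | h'
      · exact h2 X h'
      · rw [List.mem_singleton.mp h']
        exact hmN
    · intro x hx
      simp [hx]
    · intro _
      exact List.mem_append.mpr (Or.inr (List.mem_singleton.mpr rfl))
  · rw [if_neg hc]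
    refine ⟨h1, h2, fun x hx => hx, ?_⟩
    intro hmN
    have hok : pvOk g N = true := pvOk_of_mdist_succ hmN
    have hcont : PySem.Dict.contains st.1 N = true := by
      by_contra hnc
      exact hc ⟨(hcc N).mpr hok, hnc⟩
    rw [PySem.Dict.contains_eq_isSome_get?] at hcont
    rcases h : st.1.get? N with _ | v
    · rw [h] at hcont; simp at hcont
    · rcases (h1 N v).mp h with ⟨j, hjk, hj, rfl⟩ | ⟨hmem, rfl⟩
      · rw [hmN] at hj
        have := Option.some.inj hj
        omega
      · exact hmem

lemma pvBInner {g : List (List String)} {cells : PySem.Set (Int × Int)}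
    (hcc : ∀ n : Int × Int, PySem.Set.contains cells n = true ↔ pvOk g n = true)
    {s Y : Int × Int} {k : Nat} (hY : pvMdist g s Y = some k) :
    ∀ (ds : List (String × Int × Int)), (∀ d ∈ ds, d ∈ pvDirsA) →
      ∀ st, pvBM1 g s k st → pvBM2 g s k st →
      pvBM1 g s k (ds.foldl (pvBStep cells (k : Int) Y) st) ∧
      pvBM2 g s k (ds.foldl (pvBStep cells (k : Int) Y) st) ∧
      (∀ x ∈ st.2, x ∈ (ds.foldl (pvBStep cells (k : Int) Y) st).2) ∧
      (∀ N, pvMdist g s N = some (k + 1) → (∃ d ∈ ds, pvStep Y d = N) →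
        N ∈ (ds.foldl (pvBStep cells (k : Int) Y) st).2) := by
  intro ds
  induction ds with
  | nil =>
      intro _ st h1 h2
      exact ⟨h1, h2, fun x hx => hx, fun N _ h => by simp at h⟩
  | cons d ds ih =>
      intro hall st h1 h2
      obtain ⟨s1, s2, s3, s4⟩ := pvBStep_spec hcc hY h1 h2 (hall d (by simp))
      obtain ⟨i1, i2, i3, i4⟩ := ih (fun e he => hall e (by simp [he]))
        (pvBStep cells (k : Int) Y st d) s1 s2
      refine ⟨i1, i2, fun x hx => i3 x (s3 x hx), ?_⟩
      rintro N hmN ⟨e, he, hstep⟩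
      rcases List.mem_cons.mp he with rfl | he'
      · exact i3 N (hstep ▸ s4 (hstep ▸ hmN))
      · exact i4 N hmN ⟨e, he', hstep⟩

lemma pvBOuter {g : List (List String)} {cells : PySem.Set (Int × Int)}
    (hcc : ∀ n : Int × Int, PySem.Set.contains cells n = true ↔ pvOk g n = true)
    {s : Int × Int} {k : Nat} :
    ∀ (P : List (Int × Int)), (∀ Y ∈ P, pvMdist g s Y = some k) →
      ∀ st, pvBM1 g s k st → pvBM2 g s k st →
      pvBM1 g s k (P.foldl (fun st X => pvDirsA.foldl (pvBStep cells (k : Int) X) st) st) ∧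
      pvBM2 g s k (P.foldl (fun st X => pvDirsA.foldl (pvBStep cells (k : Int) X) st) st) ∧
      (∀ x ∈ st.2, x ∈ (P.foldl (fun st X => pvDirsA.foldl (pvBStep cells (k : Int) X) st) st).2) ∧
      (∀ N, pvMdist g s N = some (k + 1) → (∃ Y ∈ P, ∃ d ∈ pvDirsA, pvStep Y d = N) →
        N ∈ (P.foldl (fun st X => pvDirsA.foldl (pvBStep cells (k : Int) X) st) st).2) := by
  intro P
  induction P with
  | nil =>
      intro _ st h1 h2
      exact ⟨h1, h2, fun x hx => hx, fun N _ h => by simp at h⟩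
  | cons Y P ih =>
      intro hall st h1 h2
      obtain ⟨s1, s2, s3, s4⟩ := pvBInner hcc (hall Y (by simp)) pvDirsA
        (fun d hd => hd) st h1 h2
      obtain ⟨i1, i2, i3, i4⟩ := ih (fun Z hZ => hall Z (by simp [hZ])) _ s1 s2
      refine ⟨i1, i2, fun x hx => i3 x (s3 x hx), ?_⟩
      rintro N hmN ⟨Z, hZ, e, he, hstep⟩
      rcases List.mem_cons.mp hZ with rfl | hZ'
      · exact i3 N (s4 N hmN ⟨e, he, hstep⟩)
      · exact i4 N hmN ⟨Z, hZ', e, he, hstep⟩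

def pvBInv (g : List (List String)) (s : Int × Int)
    (dist : PySem.Dict (Int × Int) Int) (fr : List (Int × Int)) (k : Nat) : Prop :=
  (∀ X v, dist.get? X = some v ↔ ∃ j, j ≤ k ∧ pvMdist g s X = some j ∧ v = (j : Int)) ∧
  (∀ X, X ∈ fr ↔ pvMdist g s X = some k)

lemma pvBInvStep {g : List (List String)} {cells : PySem.Set (Int × Int)}
    (hcc : ∀ n : Int × Int, PySem.Set.contains cells n = true ↔ pvOk g n = true)
    {s : Int × Int} {dist : PySem.Dict (Int × Int) Int} {fr : List (Int × Int)} {k : Nat}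
    (hI : pvBInv g s dist fr k) :
    pvBInv g s
      (fr.foldl (fun st X => pvDirsA.foldl (pvBStep cells (k : Int) X) st) (dist, [])).1
      (fr.foldl (fun st X => pvDirsA.foldl (pvBStep cells (k : Int) X) st) (dist, [])).2
      (k + 1) := by
  obtain ⟨hI1, hI2⟩ := hI
  have h1 : pvBM1 g s k (dist, ([] : List (Int × Int))) := by
    intro X v
    rw [hI1 X v]
    simp
  have h2 : pvBM2 g s k (dist, ([] : List (Int × Int))) := by
    intro X hX
    simp at hX
  obtain ⟨m1, m2, _, m4⟩ := pvBOuter hcc fr (fun Y hY => (hI2 Y).mp hY) _ h1 h2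
  set st := fr.foldl (fun st X => pvDirsA.foldl (pvBStep cells (k : Int) X) st)
    (dist, ([] : List (Int × Int)))
  have hFr : ∀ X, X ∈ st.2 ↔ pvMdist g s X = some (k + 1) := by
    intro X
    constructor
    · exact m2 X
    · intro hm
      obtain ⟨Y, d, hd, hstep, hY⟩ := pvMdist_pred hm
      exact m4 X hm ⟨Y, (hI2 Y).mpr hY, d, hd, hstep⟩
  constructor
  · intro X v
    rw [m1 X v]
    constructor
    · rintro (⟨j, hjk, hj, rfl⟩ | ⟨hmem, rfl⟩)
      · exact ⟨j, by omega, hj, rfl⟩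
      · exact ⟨k + 1, le_refl _, (hFr X).mp hmem, by push_cast; ring⟩
    · rintro ⟨j, hjk, hj, rfl⟩
      rcases Nat.lt_or_ge j (k + 1) with hlt | hge
      · exact Or.inl ⟨j, by omega, hj, rfl⟩
      · have : j = k + 1 := by omega
        subst this
        exact Or.inr ⟨(hFr X).mpr hj, by push_cast; ring⟩
  · exact hFr

lemma pvBNoHigher {g : List (List String)} {s : Int × Int} {k : Nat}
    (hk : ∀ X, ¬ pvMdist g s X = some k) :
    ∀ i X, ¬ pvMdist g s X = some (k + i) := by
  intro i
  induction i with
  | zero => exact hk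
  | succ i ih =>
      intro X hX
      obtain ⟨Y, d, hd, hstep, hY⟩ := pvMdist_pred (show pvMdist g s X = some ((k + i) + 1) by
        rw [hX]; congr 1)
      exact ih Y hY

lemma pvBFinal {g : List (List String)} {s : Int × Int}
    {dist : PySem.Dict (Int × Int) Int} {k : Nat}
    (hI : pvBInv g s dist [] k) :
    ∀ X v, dist.get? X = some v ↔ ∃ j, pvMdist g s X = some j ∧ v = (j : Int) := by
  obtain ⟨hI1, hI2⟩ := hI
  have hnone : ∀ X, ¬ pvMdist g s X = some k := fun X h => by simpa using (hI2 X).mpr h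
  intro X v
  rw [hI1 X v]
  constructor
  · rintro ⟨j, _, hj, rfl⟩
    exact ⟨j, hj, rfl⟩
  · rintro ⟨j, hj, rfl⟩
    rcases Nat.lt_or_ge j k with hlt | hge
    · exact ⟨j, by omega, hj, rfl⟩
    · exfalso
      exact pvBNoHigher hnone (j - k) X (by rw [show k + (j - k) = j by omega]; exact hj)

lemma pvBRun {g : List (List String)} {cells : PySem.Set (Int × Int)}
    (hcc : ∀ n : Int × Int, PySem.Set.contains cells n = true ↔ pvOk g n = true)
    {s : Int × Int} :
    ∀ (fuel k : Nat) (dist : PySem.Dict (Int × Int) Int) (fr : List (Int × Int)),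
      pvBInv g s dist fr k → cells.length + 2 ≤ k + fuel →
      ∀ X v, (bfsLevelsB cells fuel dist fr (k : Int)).get? X = some v ↔
        ∃ j, pvMdist g s X = some j ∧ v = (j : Int) := by
  intro fuel
  induction fuel with
  | zero =>
      intro k dist fr hI hb
      have hfr : fr = [] := by
        cases fr with
        | nil => rfl
        | cons x fr' =>
            exfalso
            have hm := (hI.2 x).mp (by simp)
            have := pvMdist_le_size hcc hm
            omega
      subst hfr
      exact pvBFinal hI
  | succ fuel ih =>
      intro k dist fr hI hb
      cases fr with
      | nil =>
          exact pvBFinal hI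
      | cons x fr' =>
          rw [bfsLevelsB_step]
          have hstep := pvBInvStep hcc (fr := x :: fr') hI
          have : ((k : Int) + 1) = ((k + 1 : Nat) : Int) := by push_cast; ring
          rw [this]
          exact ih (k + 1) _ _ hstep (by omega)

lemma pvBDistChar {g : List (List String)} {cells : PySem.Set (Int × Int)}
    (hcc : ∀ n : Int × Int, PySem.Set.contains cells n = true ↔ pvOk g n = true)
    (s : Int × Int) :
    ∀ X v, (bfsLevelsB cells (cells.length + 2)
        ((PySem.Dict.empty : PySem.Dict (Int × Int) Int).insert s 0) [s] 0).get? X = some v ↔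
      ∃ j, pvMdist g s X = some j ∧ v = (j : Int) := by
  have hI : pvBInv g s ((PySem.Dict.empty : PySem.Dict (Int × Int) Int).insert s 0) [s] 0 := by
    constructor
    · intro X v
      rw [PySem.Dict.get?_insert]
      constructor
      · intro h
        split_ifs at h with hX
        · exact ⟨0, le_refl _, by rw [hX]; exact pvMdist_start g s, (Option.some.inj h).symm⟩
        · rw [PySem.Dict.get?_empty] at h
          simp at h
      · rintro ⟨j, hj0, hm, rfl⟩
        have : j = 0 := by omega
        subst this
        have := pvMdist_zero hm
        subst this
        simp
    · intro X
      simp only [List.mem_singleton]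
      constructor
      · rintro rfl
        exact pvMdist_start g X
      · intro h
        exact (pvMdist_zero h)
  have := pvBRun hcc (cells.length + 2) 0
    ((PySem.Dict.empty : PySem.Dict (Int × Int) Int).insert s 0) [s] hI (by omega)
  simpa using this

-- ---------- B side: the walk enumerates exactly the valid paths of the right length ----------
def pvEndFilter (g : List (List String)) (X endP : Int × Int) (j : Nat) :
    List (List (String × Int × Int)) :=
  (pvAllP j).filter (fun ds => pvValid g X ds && (pvTrace X ds == endP))

lemma pvStr_nil_A : pvStr [] ++ "A" = "A" := by decide
lemma pvWalk_succ (dist : PySem.Dict (Int × Int) Int) (endP : Int × Int) (j : Nat) (X : Int × Int) :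
    pvWalk dist endP (j + 1) X =
      pvDirsA.flatMap (fun d =>
        if PySem.Dict.get? dist (pvStep X d) = some (PySem.Dict.getD dist X 0 + 1) then
          (pvWalk dist endP j (pvStep X d)).map (fun q => d.1 ++ q)
        else []) := by
  rw [pvDirsA_eq_map, List.flatMap_map]
  show pvDirChars.foldl _ [] = _
  rw [PySem.List.foldl_congr_mem (g := fun out d =>
    out ++ (if PySem.Dict.get? dist (X.1 + (pvDelta d).1, X.2 + (pvDelta d).2) =
        some (PySem.Dict.getD dist X 0 + 1) then
      (pvWalk dist endP j (X.1 + (pvDelta d).1, X.2 + (pvDelta d).2)).map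
        (fun q => String.mk [d] ++ q)
    else []))]
  · exact PySem.List.foldl_append_eq_flatMap _ _ _
  · intro acc d _
    by_cases hc : PySem.Dict.get? dist (X.1 + (pvDelta d).1, X.2 + (pvDelta d).2) =
        some (PySem.Dict.getD dist X 0 + 1)
    · simp [hc]
    · simp [hc]

lemma pvFlatMap_congr {α β : Type} {l : List α} {f h : α → List β}
    (hfg : ∀ d ∈ l, f d = h d) : l.flatMap f = l.flatMap h := by
  induction l with
  | nil => rfl
  | cons a l ih =>
      simp only [List.flatMap_cons]
      rw [hfg a (by simp), ih (fun d hd => hfg d (by simp [hd]))]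

lemma pvWalk_spec {g : List (List String)} {s endP : Int × Int}
    {dist : PySem.Dict (Int × Int) Int}
    (hB : ∀ X v, dist.get? X = some v ↔ ∃ j, pvMdist g s X = some j ∧ v = (j : Int))
    {L : Nat} (hL : pvMdist g s endP = some L) :
    ∀ (j : Nat) (X : Int × Int) (m : Nat), pvMdist g s X = some m → m + j = L →
      pvWalk dist endP j X = (pvEndFilter g X endP j).map (fun ds => pvStr ds ++ "A") := by
  intro j
  induction j with
  | zero =>
      intro X m hX hmL
      show (if X = endP then ["A"] else []) = _
      unfold pvEndFilter
      by_cases hX' : X = endP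
      · subst hX'
        rw [if_pos rfl]
        have : (pvAllP 0).filter (fun ds => pvValid g X ds && (pvTrace X ds == X)) = [[]] := by
          simp [pvAllP, pvValid, pvTrace_nil]
        rw [this]
        simp [pvStr_nil_A]
      · rw [if_neg hX']
        have : (pvAllP 0).filter (fun ds => pvValid g X ds && (pvTrace X ds == endP)) = [] := by
          simp [pvAllP, pvValid, pvTrace_nil]
          exact hX'
        rw [this]
        rfl
  | succ j ih =>
      intro X m hX hmL
      rw [pvWalk_succ]
      have hgetD : PySem.Dict.getD dist X 0 = (m : Int) := by
        have : dist.get? X = some (m : Int) := (hB X (m : Int)).mpr ⟨m, hX, rfl⟩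
        rw [PySem.Dict.getD_eq_get?_getD, this]
        rfl
      -- RHS: peel one direction off the front
      have hfilter : pvEndFilter g X endP (j + 1) =
          pvDirsA.flatMap (fun d =>
            ((pvAllP j).filter (fun ds =>
              (pvOk g (pvStep X d) && pvValid g (pvStep X d) ds) &&
                (pvTrace (pvStep X d) ds == endP))).map (d :: ·)) := by
        unfold pvEndFilter
        show (pvDirsA.flatMap (fun d => (pvAllP j).map (d :: ·))).filter _ = _
        rw [List.filter_flatMap]
        congr 1
        funext d
        rw [List.filter_map]
        rfl
      rw [hfilter, List.map_flatMap]
      apply pvFlatMap_congr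
      intro d hdmem0
      by_cases hc : PySem.Dict.get? dist (pvStep X d) = some (PySem.Dict.getD dist X 0 + 1)
      · -- the pruning condition holds: dist(N) = m+1, recurse
        rw [if_pos hc]
        have hmN : pvMdist g s (pvStep X d) = some (m + 1) := by
          rw [hgetD] at hc
          obtain ⟨j', hj', hv⟩ := (hB (pvStep X d) _).mp hc
          have : j' = m + 1 := by
            have : ((m : Int) + 1) = (j' : Int) := hv
            omega
          rw [← this]
          exact hj'
        have hokN : pvOk g (pvStep X d) = true := pvOk_of_mdist_succ hmN
        rw [ih (pvStep X d) (m + 1) hmN (by omega)]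
        have hfeq : pvEndFilter g (pvStep X d) endP j =
            (pvAllP j).filter (fun ds =>
              (pvOk g (pvStep X d) && pvValid g (pvStep X d) ds) &&
                (pvTrace (pvStep X d) ds == endP)) := by
          unfold pvEndFilter
          apply List.filter_congr
          intro ds _
          rw [hokN]
          simp
        rw [List.map_map, List.map_map, ← hfeq]
        apply List.map_congr_left
        intro ds _
        show d.1 ++ (pvStr ds ++ "A") = pvStr (d :: ds) ++ "A"
        simp [pvStr, String.append_assoc]
      · -- pruning: no valid completion exists through this neighbour
        rw [if_neg hc]
        have hempty : (pvAllP j).filter (fun ds =>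
            (pvOk g (pvStep X d) && pvValid g (pvStep X d) ds) &&
              (pvTrace (pvStep X d) ds == endP)) = [] := by
          rw [List.filter_eq_nil_iff]
          intro ds hds
          simp only [Bool.and_eq_true, beq_iff_eq, not_and]
          rintro ⟨hokN, hvds⟩ htr
          -- build a witness that mdist (step X d) = m+1, contradicting hc
          have hdmem : d ∈ pvDirsA := hdmem0
          have hrN : pvReach g s (pvStep X d) (m + 1) = true :=
            pvReach_step (pvMdist_spec hX).1 hdmem hokN
          obtain ⟨j', hj', hj'le, _⟩ := pvMdist_of_reach hrN
          -- lower bound: a path start →(j') N and N →(j) endP gives reach endP (j' + j)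
          obtain ⟨q, hq, hqv, hqt⟩ := pvReach_iff.mp (pvMdist_spec hj').1
          have hcat : pvReach g s endP (j' + j) = true := by
            refine pvReach_iff.mpr ⟨q ++ ds, ?_, ?_, ?_⟩
            · refine mem_pvAllP.mpr ⟨?_, ?_⟩
              · rw [List.length_append, (mem_pvAllP.mp hq).1, (mem_pvAllP.mp hds).1]
              · intro e he
                rcases List.mem_append.mp he with h | h
                · exact (mem_pvAllP.mp hq).2 e h
                · exact (mem_pvAllP.mp hds).2 e h
            · rw [pvValid_append, Bool.and_eq_true, hqt]
              exact ⟨hqv, hvds⟩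
            · rw [pvTrace_append, hqt]
              exact htr
          have hLlow := (pvMdist_spec hL).2.2
          have hj'big : j' = m + 1 := by
            by_contra hne
            have h1 : j' + j < L := by omega
            exact absurd hcat (by simp [hLlow _ h1])
          apply hc
          rw [hgetD]
          subst hj'big
          exact (hB (pvStep X d) _).mpr ⟨m + 1, hj', by push_cast; ring⟩
        rw [hempty]
        rfl

lemma pvAllShortest_spec {g : List (List String)} {cells : PySem.Set (Int × Int)}
    (hcc : ∀ n : Int × Int, PySem.Set.contains cells n = true ↔ pvOk g n = true)
    (s endP : Int × Int) :
    pvAllShortest s endP cells =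
      (match pvMdist g s endP with
       | none => []
       | some L => (pvEndFilter g s endP L).map (fun ds => pvStr ds ++ "A")) := by
  unfold pvAllShortest
  have hB := pvBDistChar hcc s
  set dist := bfsLevelsB cells (cells.length + 2)
    ((PySem.Dict.empty : PySem.Dict (Int × Int) Int).insert s 0) [s] 0 with hdist
  cases hm : pvMdist g s endP with
  | none =>
      have : PySem.Dict.contains dist endP ≠ true := by
        rw [PySem.Dict.contains_eq_isSome_get?]
        rcases h : dist.get? endP with _ | v
        · simp
        · obtain ⟨j, hj, _⟩ := (hB endP v).mp h
          rw [hm] at hj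
          simp at hj
      rw [if_neg this]
  | some L =>
      have hget : dist.get? endP = some (L : Int) := (hB endP _).mpr ⟨L, hm, rfl⟩
      have hcont : PySem.Dict.contains dist endP = true := by
        rw [PySem.Dict.contains_eq_isSome_get?, hget]
        rfl
      rw [if_pos hcont]
      have hgetD : PySem.Dict.getD dist endP 0 = (L : Int) := by
        rw [PySem.Dict.getD_eq_get?_getD, hget]
        rfl
      rw [hgetD]
      have : ((L : Int)).toNat = L := by omega
      rw [this]
      exact pvWalk_spec hB hm L s 0 (pvMdist_start g s) (by omega)

-- ---------- A side: layer formulation of the FIFO BFS ----------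
def pvPushCond (g : List (List String)) (vis : PySem.Set (Int × Int))
    (e : (Int × Int) × String) (d : String × Int × Int) : Bool :=
  decide (0 ≤ (pvStep e.1 d).1 ∧ (pvStep e.1 d).1 < (g.length : Int) ∧
    0 ≤ (pvStep e.1 d).2 ∧ (pvStep e.1 d).2 < ((g.headD []).length : Int)) &&
  (!(PySem.Set.contains vis (pvStep e.1 d)) && decide (pvCell g (pvStep e.1 d) ≠ "-"))
def pvPush (g : List (List String)) (vis : PySem.Set (Int × Int))
    (e : (Int × Int) × String) : List ((Int × Int) × String) :=
  (pvDirsA.filter (pvPushCond g vis e)).map (fun d => (pvStep e.1 d, e.2 ++ d.1))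
def pvExpand (g : List (List String)) (endP : Int × Int)
    (st : List ((Int × Int) × String) × PySem.Set (Int × Int)) (e : (Int × Int) × String) :
    List ((Int × Int) × String) × PySem.Set (Int × Int) :=
  if e.1 = endP then st
  else (st.1 ++ pvPush g (PySem.Set.add st.2 e.1) e, PySem.Set.add st.2 e.1)
def pvLV (g : List (List String)) (endP start : Int × Int) :
    Nat → List ((Int × Int) × String) × PySem.Set (Int × Int)
  | 0 => ([(start, "")], PySem.Set.empty)
  | n + 1 => (pvLV g endP start n).1.foldl (pvExpand g endP) ([], (pvLV g endP start n).2)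

lemma pvPushCond_iff {g : List (List String)} {vis : PySem.Set (Int × Int)}
    {e : (Int × Int) × String} {d : String × Int × Int} :
    pvPushCond g vis e d = true ↔
      (pvOk g (pvStep e.1 d) = true ∧ ¬ (pvStep e.1 d) ∈ vis) := by
  unfold pvPushCond pvOk pvCols
  rw [← PySem.Set.contains_iff vis (pvStep e.1 d)]
  cases h : PySem.Set.contains vis (pvStep e.1 d) with
  | true => simp [h]
  | false => simp [h]; tauto

lemma pvExpand_end {g : List (List String)} {endP : Int × Int}
    {st : List ((Int × Int) × String) × PySem.Set (Int × Int)} {e : (Int × Int) × String}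
    (h : e.1 = endP) : pvExpand g endP st e = st := by
  unfold pvExpand; rw [if_pos h]
lemma pvExpand_go {g : List (List String)} {endP : Int × Int}
    {st : List ((Int × Int) × String) × PySem.Set (Int × Int)} {e : (Int × Int) × String}
    (h : ¬ e.1 = endP) :
    pvExpand g endP st e =
      (st.1 ++ pvPush g (PySem.Set.add st.2 e.1) e, PySem.Set.add st.2 e.1) := by
  unfold pvExpand; rw [if_neg h]

-- the port's inner direction loop produces exactly rest ++ pvPush
lemma pvQueue'_eq (g : List (List String)) (r c : Int) (path : String)
    (rest : List ((Int × Int) × String)) (vis' : PySem.Set (Int × Int)) :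
    pvDirsA.foldl (fun q d =>
      let nr := r + d.2.1
      let nc := c + d.2.2
      if 0 ≤ nr ∧ nr < (g.length : Int) ∧ 0 ≤ nc ∧ nc < ((g.headD []).length : Int) then
        if ¬ PySem.Set.contains vis' (nr, nc) ∧
            PySem.List.pyGetD (PySem.List.pyGetD g nr []) nc "" ≠ "-" then
          q ++ [((nr, nc), path ++ d.1)]
        else q
      else q) rest
    = rest ++ pvPush g vis' ((r, c), path) := by
  unfold pvPush
  rw [PySem.List.foldl_congr_mem (g := fun q d =>
    if pvPushCond g vis' ((r, c), path) d then q ++ [(pvStep (r, c) d, path ++ d.1)] else q)]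
  · exact PySem.List.foldl_append_if _ _ _ _
  · intro acc d _
    show (if (0 ≤ r + d.2.1 ∧ r + d.2.1 < (g.length : Int) ∧ 0 ≤ c + d.2.2 ∧
        c + d.2.2 < ((g.headD []).length : Int)) then
          if ¬ PySem.Set.contains vis' (r + d.2.1, c + d.2.2) ∧
              PySem.List.pyGetD (PySem.List.pyGetD g (r + d.2.1) []) (c + d.2.2) "" ≠ "-" then
            acc ++ [((r + d.2.1, c + d.2.2), path ++ d.1)]
          else acc
        else acc) = _
    have hstep : pvStep (r, c) d = (r + d.2.1, c + d.2.2) := rfl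
    unfold pvPushCond
    rw [hstep]
    by_cases hb : 0 ≤ r + d.2.1 ∧ r + d.2.1 < (g.length : Int) ∧
        0 ≤ c + d.2.2 ∧ c + d.2.2 < ((g.headD []).length : Int)
    · rw [if_pos hb]
      by_cases hcc : ¬ PySem.Set.contains vis' (r + d.2.1, c + d.2.2) = true ∧
          PySem.List.pyGetD (PySem.List.pyGetD g (r + d.2.1) []) (c + d.2.2) "" ≠ "-"
      · rw [if_pos hcc]
        have hcf : PySem.Set.contains vis' (r + d.2.1, c + d.2.2) = false :=
          Bool.not_eq_true _ ▸ hcc.1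
        have hcond : (decide (0 ≤ r + d.2.1 ∧ r + d.2.1 < (g.length : Int) ∧
            0 ≤ c + d.2.2 ∧ c + d.2.2 < ((g.headD []).length : Int)) &&
            (!(PySem.Set.contains vis' (r + d.2.1, c + d.2.2)) &&
              decide (pvCell g (r + d.2.1, c + d.2.2) ≠ "-"))) = true := by
          rw [Bool.and_eq_true]
          refine ⟨decide_eq_true hb, ?_⟩
          rw [Bool.and_eq_true]
          exact ⟨by rw [hcf]; rfl, decide_eq_true hcc.2⟩
        rw [if_pos hcond]
      · rw [if_neg hcc]
        have hcond : (decide (0 ≤ r + d.2.1 ∧ r + d.2.1 < (g.length : Int) ∧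
            0 ≤ c + d.2.2 ∧ c + d.2.2 < ((g.headD []).length : Int)) &&
            (!(PySem.Set.contains vis' (r + d.2.1, c + d.2.2)) &&
              decide (pvCell g (r + d.2.1, c + d.2.2) ≠ "-"))) = false := by
          rw [Bool.and_eq_false_iff]
          right
          rw [Bool.and_eq_false_iff]
          by_cases hc1 : PySem.Set.contains vis' (r + d.2.1, c + d.2.2) = true
          · left; rw [hc1]; rfl
          · right
            have hcell : PySem.List.pyGetD (PySem.List.pyGetD g (r + d.2.1) []) (c + d.2.2) "" = "-" := by
              by_contra hne
              exact hcc ⟨hc1, hne⟩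
            exact decide_eq_false (fun hne => hne hcell)
        rw [if_neg (by rw [hcond]; exact Bool.false_ne_true)]
    · rw [if_neg hb]
      have hcond : (decide (0 ≤ r + d.2.1 ∧ r + d.2.1 < (g.length : Int) ∧
          0 ≤ c + d.2.2 ∧ c + d.2.2 < ((g.headD []).length : Int)) &&
          (!(PySem.Set.contains vis' (r + d.2.1, c + d.2.2)) &&
            decide (pvCell g (r + d.2.1, c + d.2.2) ≠ "-"))) = false := by
        rw [Bool.and_eq_false_iff]
        left
        exact decide_eq_false hb
      rw [if_neg (by rw [hcond]; exact Bool.false_ne_true)]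

-- membership in the visited set after folding a layer
lemma pvExpand_vis_mem (g : List (List String)) (endP : Int × Int) (x : Int × Int) :
    ∀ (es : List ((Int × Int) × String)) (init : List ((Int × Int) × String))
      (vis : PySem.Set (Int × Int)),
      (x ∈ (es.foldl (pvExpand g endP) (init, vis)).2 ↔
        x ∈ vis ∨ ∃ e ∈ es, e.1 ≠ endP ∧ x = e.1) := by
  intro es
  induction es with
  | nil => intro init vis; simp
  | cons e es ih =>
      intro init vis
      rw [List.foldl_cons]
      by_cases he : e.1 = endP
      · rw [pvExpand_end he, ih init vis]
        constructor
        · rintro (h | ⟨f, hf, h1, h2⟩)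
          · exact Or.inl h
          · exact Or.inr ⟨f, by simp [hf], h1, h2⟩
        · rintro (h | ⟨f, hf, h1, h2⟩)
          · exact Or.inl h
          · rcases List.mem_cons.mp hf with rfl | hf'
            · exact absurd he h1
            · exact Or.inr ⟨f, hf', h1, h2⟩
      · rw [pvExpand_go he, ih _ _]
        rw [PySem.Set.mem_add _ _ _]
        constructor
        · rintro ((h | h) | ⟨f, hf, h1, h2⟩)
          · exact Or.inl h
          · exact Or.inr ⟨e, by simp, he, h⟩
          · exact Or.inr ⟨f, by simp [hf], h1, h2⟩
        · rintro (h | ⟨f, hf, h1, h2⟩)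
          · exact Or.inl (Or.inl h)
          · rcases List.mem_cons.mp hf with rfl | hf'
            · exact Or.inl (Or.inr h2)
            · exact Or.inr ⟨f, hf', h1, h2⟩

-- cells of a nonempty path split as earlier cells plus final cell
lemma pvCellsA_ne_nil (s : Int × Int) {ds : List (String × Int × Int)} (h : ds ≠ []) :
    pvCellsA s ds ≠ [] := by
  cases ds with
  | nil => exact absurd rfl h
  | cons d ds => simp [pvCellsA]
lemma pvCellsA_getLast (s : Int × Int) {ds : List (String × Int × Int)} (h : ds ≠ []) :
    (pvCellsA s ds).getLast (pvCellsA_ne_nil s h) = pvTrace s ds := by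
  induction ds generalizing s with
  | nil => exact absurd rfl h
  | cons d ds ih =>
      cases ds with
      | nil => rfl
      | cons d' ds' =>
          show (pvStep s d :: pvCellsA (pvStep s d) (d' :: ds')).getLast (by simp [pvCellsA]) = _
          rw [List.getLast_cons (pvCellsA_ne_nil (pvStep s d) (by simp))]
          exact ih (pvStep s d) (by simp)
lemma pvCellsA_split (s : Int × Int) (ds : List (String × Int × Int)) (hne : ds ≠ []) :
    pvCellsA s ds = (pvCellsA s ds).dropLast ++ [pvTrace s ds] := by
  rw [← pvCellsA_getLast s hne]
  exact (List.dropLast_append_getLast (pvCellsA_ne_nil s hne)).symm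

lemma pvStr_singleton (d : String × Int × Int) : pvStr [d] = d.1 := by
  show d.1 ++ "" = d.1
  simp

-- entry invariant: every entry of layer k is a valid simple path of length k whose
-- earlier cells are already visited
def pvEInv (g : List (List String)) (start : Int × Int) (k : Nat)
    (visP : (Int × Int) → Prop) (e : (Int × Int) × String) : Prop :=
  ∃ ds, ds ∈ pvAllP k ∧ pvValid g start ds = true ∧ pvTrace start ds = e.1 ∧
    pvStr ds = e.2 ∧ (pvCellsA start ds).Nodup ∧
    (∀ x ∈ (pvCellsA start ds).dropLast, visP x)

-- one layer-expansion step preserves the entry invariant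
lemma pvExpandChunk (g : List (List String)) (endP start : Int × Int) (k : Nat) :
    ∀ (es : List ((Int × Int) × String)),
      (∀ e ∈ es, pvEInv g start k (fun x => x ∈ (pvLV g endP start k).2) e) →
      ∀ (init : List ((Int × Int) × String)) (vis : PySem.Set (Int × Int)),
      (∀ x ∈ (pvLV g endP start k).2, x ∈ vis) →
      (∀ e ∈ es, e ∈ (pvLV g endP start k).1) →
      (∀ e ∈ init, pvEInv g start (k + 1)
        (fun x => x ∈ (pvLV g endP start k).2 ∨
          ∃ f ∈ (pvLV g endP start k).1, f.1 ≠ endP ∧ x = f.1) e) →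
      (∀ e ∈ (es.foldl (pvExpand g endP) (init, vis)).1,
        pvEInv g start (k + 1)
          (fun x => x ∈ (pvLV g endP start k).2 ∨
            ∃ f ∈ (pvLV g endP start k).1, f.1 ≠ endP ∧ x = f.1) e) := by
  intro es
  induction es with
  | nil =>
      intro _ init vis _ _ hinit
      exact hinit
  | cons e es ih =>
      intro hes init vis h1 hmem hinit
      rw [List.foldl_cons]
      by_cases hend : e.1 = endP
      · rw [pvExpand_end hend]
        exact ih (fun f hf => hes f (by simp [hf])) init vis h1
          (fun f hf => hmem f (by simp [hf])) hinit
      · rw [pvExpand_go hend]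
        obtain ⟨ds, hds, hv, ht, hs, hnd, hdl⟩ := hes e (by simp)
        refine ih (fun f hf => hes f (by simp [hf])) _ _
          (fun x hx => (PySem.Set.mem_add _ _ _).mpr (Or.inl (h1 x hx)))
          (fun f hf => hmem f (by simp [hf])) ?_
        intro f hf
        rcases List.mem_append.mp hf with hf' | hf'
        · exact hinit f hf'
        · -- f is a fresh push from e
          unfold pvPush at hf'
          simp only [List.mem_map, List.mem_filter] at hf'
          obtain ⟨d, ⟨hdmem, hdcond⟩, rfl⟩ := hf'
          obtain ⟨hok, hnvis⟩ := pvPushCond_iff.mp hdcond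
          -- every cell of ds lies in vis.add e.1
          have hcells : ∀ x ∈ pvCellsA start ds, x ∈ PySem.Set.add vis e.1 := by
            intro x hx
            cases hdse : ds with
            | nil => rw [hdse] at hx; exact absurd hx (by simp [pvCellsA])
            | cons dd dds =>
                rw [pvCellsA_split start ds (by rw [hdse]; simp)] at hx
                rcases List.mem_append.mp hx with h | h
                · exact (PySem.Set.mem_add _ _ _).mpr (Or.inl (h1 x (hdl x h)))
                · rw [List.mem_singleton.mp h, ht]
                  exact (PySem.Set.mem_add _ _ _).mpr (Or.inr rfl)
          refine ⟨ds ++ [d], ?_, ?_, ?_, ?_, ?_, ?_⟩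
          · refine mem_pvAllP.mpr ⟨by simp [(mem_pvAllP.mp hds).1], ?_⟩
            intro x hx
            rcases List.mem_append.mp hx with h | h
            · exact (mem_pvAllP.mp hds).2 x h
            · rw [List.mem_singleton.mp h]; exact hdmem
          · rw [pvValid_append, Bool.and_eq_true]
            refine ⟨hv, ?_⟩
            show (pvOk g (pvStep (pvTrace start ds) d) && _) = true
            rw [ht]
            simp [hok, pvValid]
          · rw [pvTrace_append, ht]
            rfl
          · rw [pvStr_append, hs, pvStr_singleton]
          · rw [pvCellsA_append, ht]
            show (pvCellsA start ds ++ [pvStep e.1 d]).Nodup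
            rw [List.nodup_append]
            refine ⟨hnd, by simp, ?_⟩
            intro x hx y hy
            rw [List.mem_singleton] at hy
            subst hy
            intro hxy
            exact hnvis (by rw [← hxy]; exact hcells x hx)
          · intro x hx
            rw [pvCellsA_append, ht] at hx
            have hdrop : (pvCellsA start ds ++ pvCellsA e.1 [d]).dropLast = pvCellsA start ds := by
              show (pvCellsA start ds ++ [pvStep e.1 d]).dropLast = _
              rw [List.dropLast_concat]
            rw [hdrop] at hx
            cases hdse : ds with
            | nil => rw [hdse] at hx; exact absurd hx (by simp [pvCellsA])
            | cons dd dds =>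
                rw [pvCellsA_split start ds (by rw [hdse]; simp)] at hx
                rcases List.mem_append.mp hx with h | h
                · exact Or.inl (hdl x h)
                · rw [List.mem_singleton.mp h, ht]
                  exact Or.inr ⟨e, hmem e (by simp), hend, rfl⟩

-- the two joint layer invariants
lemma pvLayerInv (g : List (List String)) (endP start : Int × Int) : ∀ (k : Nat),
    (∀ e ∈ (pvLV g endP start k).1,
      pvEInv g start k (fun x => x ∈ (pvLV g endP start k).2) e) ∧
    (∀ x ∈ (pvLV g endP start k).2, ∃ j, j < k ∧ pvReach g start x j = true) := by
  intro k
  induction k with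
  | zero =>
      constructor
      · intro e he
        rw [show (pvLV g endP start 0).1 = [(start, "")] from rfl] at he
        rw [List.mem_singleton.mp he]
        exact ⟨[], by simp [pvAllP], rfl, rfl, rfl, by simp [pvCellsA], by simp [pvCellsA]⟩
      · intro x hx
        exact absurd hx (by simp [pvLV, PySem.Set.empty])
  | succ k ih =>
      have hstep : pvLV g endP start (k + 1) =
          (pvLV g endP start k).1.foldl (pvExpand g endP) ([], (pvLV g endP start k).2) := rfl
      have hreach : ∀ e ∈ (pvLV g endP start k).1, pvReach g start e.1 k = true := by
        intro e he
        obtain ⟨ds, hds, hv, ht, _, _, _⟩ := ih.1 e he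
        exact pvReach_iff.mpr ⟨ds, hds, hv, ht⟩
      constructor
      · intro e he
        rw [hstep] at he
        have := pvExpandChunk g endP start k (pvLV g endP start k).1 ih.1 []
          (pvLV g endP start k).2 (fun x hx => hx) (fun f hf => hf) (by simp) e he
        obtain ⟨ds, h1, h2, h3, h4, h5, h6⟩ := this
        refine ⟨ds, h1, h2, h3, h4, h5, ?_⟩
        intro x hx
        rw [hstep, pvExpand_vis_mem g endP x _ _ _]
        exact h6 x hx
      · intro x hx
        rw [hstep, pvExpand_vis_mem g endP x _ _ _] at hx
        rcases hx with h | ⟨e, he, hne, rfl⟩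
        · obtain ⟨j, hj, hr⟩ := ih.2 x h
          exact ⟨j, by omega, hr⟩
        · exact ⟨k, by omega, hreach e he⟩

-- layers die out: no entries beyond pvRC g
lemma pvLayer_empty (g : List (List String)) (endP start : Int × Int) {k : Nat}
    (hk : pvRC g < k) : (pvLV g endP start k).1 = [] := by
  rcases h : (pvLV g endP start k).1 with _ | ⟨e, es⟩
  · rfl
  · exfalso
    have he : e ∈ (pvLV g endP start k).1 := by rw [h]; simp
    obtain ⟨ds, hds, hv, _, _, hnd, _⟩ := (pvLayerInv g endP start k).1 e he
    have hlen : ds.length = k := (mem_pvAllP.mp hds).1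
    have := pvNodup_length_le (g := g) (pvCellsA_ok g start ds hv) hnd
    rw [pvCellsA_length, hlen] at this
    omega

-- layer size bound
lemma pvExpand_size (g : List (List String)) (endP : Int × Int) :
    ∀ (es : List ((Int × Int) × String)) (init : List ((Int × Int) × String))
      (vis : PySem.Set (Int × Int)),
      (es.foldl (pvExpand g endP) (init, vis)).1.length ≤ init.length + 4 * es.length := by
  intro es
  induction es with
  | nil => intro init vis; simp
  | cons e es ih =>
      intro init vis
      rw [List.foldl_cons]
      by_cases he : e.1 = endP
      · rw [pvExpand_end he]
        have := ih init vis
        simp only [List.length_cons]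
        omega
      · rw [pvExpand_go he]
        have h1 := ih (init ++ pvPush g (PySem.Set.add vis e.1) e) (PySem.Set.add vis e.1)
        have h2 : (pvPush g (PySem.Set.add vis e.1) e).length ≤ 4 := by
          unfold pvPush
          rw [List.length_map]
          calc (pvDirsA.filter _).length ≤ pvDirsA.length := List.length_filter_le _ _
            _ = 4 := rfl
        rw [List.length_append] at h1
        simp only [List.length_cons]
        omega
lemma pvLayer_size (g : List (List String)) (endP start : Int × Int) :
    ∀ (k : Nat), (pvLV g endP start k).1.length ≤ 4 ^ k := by
  intro k
  induction k with
  | zero => simp [pvLV]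
  | succ k ih =>
      have := pvExpand_size g endP (pvLV g endP start k).1 [] (pvLV g endP start k).2
      have h4 : 4 * (pvLV g endP start k).1.length ≤ 4 * 4 ^ k := by omega
      calc (pvLV g endP start (k + 1)).1.length ≤ 0 + 4 * (pvLV g endP start k).1.length := this
    _ ≤ 4 * 4 ^ k := by omega
    _ = 4 ^ (k + 1) := by ring

-- ---------- A side: the geodesic entries of layer k, in order ----------
def pvGoodPush (g : List (List String)) (start : Int × Int) (k : Nat)
    (e : (Int × Int) × String) : List ((Int × Int) × String) :=
  (pvDirsA.filter (fun d => pvOk g (pvStep e.1 d) &&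
      (pvMdist g start (pvStep e.1 d) == some (k + 1)))).map
    (fun d => (pvStep e.1 d, e.2 ++ d.1))
def pvGoodPaths (g : List (List String)) (start : Int × Int) (k : Nat) :
    List (List (String × Int × Int)) :=
  (pvAllP k).filter (fun ds => pvValid g start ds &&
    (pvMdist g start (pvTrace start ds) == some k))

lemma pvFlatMap_if_filter {α β : Type} (l : List α) (p : α → Bool) (f : α → List β) :
    l.flatMap (fun e => if p e then f e else []) = (l.filter p).flatMap f := by
  induction l with
  | nil => rfl
  | cons a l ih =>
      rw [List.flatMap_cons, ih]
      by_cases h : p a = true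
      · rw [if_pos h, List.filter_cons_of_pos h, List.flatMap_cons]
      · rw [Bool.not_eq_true] at h
        rw [if_neg (by rw [h]; exact Bool.false_ne_true), List.filter_cons_of_neg (by simp [h])]
        rfl

lemma pvPush_filter_good {g : List (List String)} {start : Int × Int} {k : Nat}
    {vis : PySem.Set (Int × Int)} {e : (Int × Int) × String}
    (hvb : ∀ x ∈ vis, ∃ j, j ≤ k ∧ pvMdist g start x = some j) :
    (pvPush g vis e).filter (fun f => pvMdist g start f.1 == some (k + 1)) =
      pvGoodPush g start k e := by
  unfold pvPush pvGoodPush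
  rw [List.filter_map, List.filter_filter]
  congr 1
  apply List.filter_congr
  intro d _
  simp only [Function.comp_def]
  by_cases hgood : pvMdist g start (pvStep e.1 d) = some (k + 1)
  · have hok : pvOk g (pvStep e.1 d) = true := pvOk_of_mdist_succ hgood
    have hnv : ¬ (pvStep e.1 d) ∈ vis := by
      intro hmem
      obtain ⟨j, hj, hmj⟩ := hvb _ hmem
      rw [hgood] at hmj
      have := Option.some.inj hmj
      omega
    simp [pvPushCond_iff.mpr ⟨hok, hnv⟩, hok, hgood]
  · simp [beq_eq_false_iff_ne.mpr hgood]

lemma pvPush_filter_stale {g : List (List String)} {start : Int × Int} {k j : Nat}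
    {vis : PySem.Set (Int × Int)} {e : (Int × Int) × String}
    (he : pvMdist g start e.1 = some j) (hj : j < k) :
    (pvPush g vis e).filter (fun f => pvMdist g start f.1 == some (k + 1)) = [] := by
  rw [List.filter_eq_nil_iff]
  intro f hf
  unfold pvPush at hf
  simp only [List.mem_map, List.mem_filter] at hf
  obtain ⟨d, ⟨hdmem, hdcond⟩, rfl⟩ := hf
  obtain ⟨hok, _⟩ := pvPushCond_iff.mp hdcond
  obtain ⟨j', hj', hj'le⟩ := pvMdist_step_le he hdmem hok
  intro hcontra
  rw [beq_iff_eq] at hcontra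
  rw [hj'] at hcontra
  have := Option.some.inj hcontra
  omega

lemma pvGoodFold (g : List (List String)) (endP start : Int × Int) (k : Nat) :
    ∀ (es : List ((Int × Int) × String)),
      (∀ e ∈ es, ∃ j, j ≤ k ∧ pvMdist g start e.1 = some j) →
      (∀ e ∈ es, pvMdist g start e.1 = some k → e.1 ≠ endP) →
      ∀ (init : List ((Int × Int) × String)) (vis : PySem.Set (Int × Int)),
      (∀ x ∈ vis, ∃ j, j ≤ k ∧ pvMdist g start x = some j) →
      ((es.foldl (pvExpand g endP) (init, vis)).1).filter
          (fun f => pvMdist g start f.1 == some (k + 1)) =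
        init.filter (fun f => pvMdist g start f.1 == some (k + 1)) ++
          es.flatMap (fun e =>
            if pvMdist g start e.1 == some k then pvGoodPush g start k e else []) := by
  intro es
  induction es with
  | nil =>
      intro _ _ init vis _
      simp
  | cons e es ih =>
      intro hes hnend init vis hvb
      rw [List.foldl_cons, List.flatMap_cons]
      obtain ⟨j, hjk, hj⟩ := hes e (by simp)
      by_cases hend : e.1 = endP
      · rw [pvExpand_end hend]
        have hnotk : (pvMdist g start e.1 == some k) = false := by
          rw [beq_eq_false_iff_ne]
          intro hk
          exact hnend e (by simp) hk hend
        rw [if_neg (by rw [hnotk]; exact Bool.false_ne_true)]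
        rw [ih (fun f hf => hes f (by simp [hf])) (fun f hf => hnend f (by simp [hf])) init vis hvb]
        simp
      · rw [pvExpand_go hend]
        have hvb' : ∀ x ∈ PySem.Set.add vis e.1, ∃ j', j' ≤ k ∧ pvMdist g start x = some j' := by
          intro x hx
          rcases (PySem.Set.mem_add _ _ _).mp hx with h | rfl
          · exact hvb x h
          · exact ⟨j, hjk, hj⟩
        rw [ih (fun f hf => hes f (by simp [hf])) (fun f hf => hnend f (by simp [hf])) _ _ hvb']
        rw [List.filter_append]
        by_cases hk : pvMdist g start e.1 = some k
        · rw [if_pos (by rw [hk]; simp)]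
          rw [pvPush_filter_good hvb']
          simp [List.append_assoc]
        · have : j < k := by
            rcases Nat.lt_or_ge j k with h | h
            · exact h
            · exfalso; exact hk (by rw [← Nat.le_antisymm hjk h]; exact hj)
          rw [if_neg (by rw [beq_eq_false_iff_ne.mpr hk]; exact Bool.false_ne_true)]
          rw [pvPush_filter_stale hj this]
          simp

lemma pvFilter_subsume {α : Type} {l : List α} {p q : α → Bool}
    (h : ∀ a ∈ l, p a = true → q a = true) : l.filter p = (l.filter q).filter p := by
  rw [List.filter_filter]
  apply List.filter_congr
  intro a ha
  by_cases hp : p a = true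
  · simp [hp, h a ha hp]
  · rw [Bool.not_eq_true] at hp
    rw [hp, Bool.false_and]

lemma pvGood (g : List (List String)) (endP start : Int × Int) {L : Nat}
    (hLm : pvMdist g start endP = some L) :
    ∀ k, k ≤ L →
      (pvLV g endP start k).1.filter (fun f => pvMdist g start f.1 == some k) =
        (pvGoodPaths g start k).map (fun ds => (pvTrace start ds, pvStr ds)) := by
  intro k
  induction k with
  | zero =>
      intro _
      have hgood : (pvMdist g start start == some 0) = true := by
        rw [beq_iff_eq]; exact pvMdist_start g start
      have h1 : (pvLV g endP start 0).1.filter (fun f => pvMdist g start f.1 == some 0) =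
          [(start, "")] := by
        show List.filter _ [(start, "")] = _
        simp [List.filter_cons, hgood]
      have hrhs : pvGoodPaths g start 0 = [[]] := by
        unfold pvGoodPaths
        show List.filter _ [[]] = [[]]
        have hgood2 : (pvValid g start [] &&
            (pvMdist g start (pvTrace start []) == some 0)) = true := by
          rw [show pvValid g start [] = true from rfl, Bool.true_and, beq_iff_eq]
          exact pvMdist_start g start
        simp [List.filter_cons, hgood2]
      rw [h1, hrhs]
      rfl
  | succ k ih =>
      intro hk1
      have hk : k ≤ L := by omega
      have hlv : (pvLV g endP start (k + 1)).1 =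
          ((pvLV g endP start k).1.foldl (pvExpand g endP) ([], (pvLV g endP start k).2)).1 := rfl
      have hreach : ∀ e ∈ (pvLV g endP start k).1, ∃ j, j ≤ k ∧ pvMdist g start e.1 = some j := by
        intro e he
        obtain ⟨ds, hds, hv, ht, _, _, _⟩ := (pvLayerInv g endP start k).1 e he
        obtain ⟨j, hj, hjk, _⟩ := pvMdist_of_reach (pvReach_iff.mpr ⟨ds, hds, hv, ht⟩)
        have hlen : ds.length = k := (mem_pvAllP.mp hds).1
        exact ⟨j, by omega, hj⟩
      have hnend : ∀ e ∈ (pvLV g endP start k).1, pvMdist g start e.1 = some k → e.1 ≠ endP := by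
        intro e _ hek heq
        rw [heq, hLm] at hek
        have := Option.some.inj hek
        omega
      have hvb : ∀ x ∈ (pvLV g endP start k).2, ∃ j, j ≤ k ∧ pvMdist g start x = some j := by
        intro x hx
        obtain ⟨j, hj, hr⟩ := (pvLayerInv g endP start k).2 x hx
        obtain ⟨j', hj', hj'le, _⟩ := pvMdist_of_reach hr
        exact ⟨j', by omega, hj'⟩
      rw [hlv, pvGoodFold g endP start k (pvLV g endP start k).1 hreach hnend []
        (pvLV g endP start k).2 hvb]
      rw [List.filter_nil, List.nil_append, pvFlatMap_if_filter, ih hk, List.flatMap_map]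
      -- decompose goodPaths (k+1) from the back
      have hrhs : pvGoodPaths g start (k + 1) =
          (pvGoodPaths g start k).flatMap (fun ds =>
            (pvDirsA.filter (fun d => pvOk g (pvStep (pvTrace start ds) d) &&
              (pvMdist g start (pvStep (pvTrace start ds) d) == some (k + 1)))).map
              (fun d => ds ++ [d])) := by
        show ((pvAllP (k+1)).filter _) = _
        rw [pvAllP_back, List.filter_flatMap]
        refine Eq.trans (pvFlatMap_congr (h := fun ds => if (pvValid g start ds &&
            (pvMdist g start (pvTrace start ds) == some k)) then
              (pvDirsA.filter (fun d => pvOk g (pvStep (pvTrace start ds) d) &&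
                (pvMdist g start (pvStep (pvTrace start ds) d) == some (k + 1)))).map
                (fun d => ds ++ [d])
            else []) ?_) (by rw [pvFlatMap_if_filter]; rfl)
        intro ds hds
        -- pointwise: filter over the four extensions of ds
        beta_reduce
        rw [List.filter_map]
        by_cases hc : (pvValid g start ds &&
            (pvMdist g start (pvTrace start ds) == some k)) = true
        · rw [if_pos hc]
          rw [Bool.and_eq_true, beq_iff_eq] at hc
          congr 1
          apply List.filter_congr
          intro d _
          simp only [Function.comp_def]
          rw [pvValid_append, pvTrace_append, hc.1]
          show (true && (pvOk g (pvStep (pvTrace start ds) d) && true) &&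
              (pvMdist g start (pvTrace (pvTrace start ds) [d]) == some (k + 1))) = _
          rw [show pvTrace (pvTrace start ds) [d] = pvStep (pvTrace start ds) d from rfl]
          simp
        · rw [if_neg hc]
          have hnil : pvDirsA.filter ((fun es => pvValid g start es &&
              (pvMdist g start (pvTrace start es) == some (k + 1))) ∘ fun d => ds ++ [d]) = [] := by
            rw [List.filter_eq_nil_iff]
            intro d hd
            simp only [Function.comp_def]
            intro hG
            rw [pvValid_append, pvTrace_append] at hG
            rw [Bool.and_eq_true, Bool.and_eq_true, beq_iff_eq] at hG
            obtain ⟨⟨hvds, hvd⟩, hmd⟩ := hG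
            have hok : pvOk g (pvStep (pvTrace start ds) d) = true := by
              have : pvValid g (pvTrace start ds) [d] = true := hvd
              rw [show pvValid g (pvTrace start ds) [d] =
                (pvOk g (pvStep (pvTrace start ds) d) && true) from rfl] at this
              simpa using this
            have hlen : ds.length = k := (mem_pvAllP.mp hds).1
            obtain ⟨j, hj, hjk, _⟩ := pvMdist_of_reach
              (pvReach_iff.mpr ⟨ds, hds, hvds, rfl⟩)
            have hjk' : j ≤ k := by omega
            obtain ⟨j', hj', hj'le⟩ := pvMdist_step_le hj hd hok
            rw [show pvTrace (pvTrace start ds) [d] = pvStep (pvTrace start ds) d from rfl] at hmd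
            rw [hj'] at hmd
            have hj'eq := Option.some.inj hmd
            have hjeq : j = k := by omega
            apply hc
            rw [Bool.and_eq_true, beq_iff_eq]
            exact ⟨hvds, by rw [hj, hjeq]⟩
          rw [hnil, List.map_nil]
      rw [hrhs, List.map_flatMap]
      apply pvFlatMap_congr
      intro ds _
      unfold pvGoodPush
      rw [List.map_map]
      apply List.map_congr_left
      intro d _
      simp only [Function.comp_def]
      rw [pvTrace_append, pvStr_append, pvStr_singleton]
      rfl

-- the end entries of layer L are exactly the shortest paths, in order
lemma pvEnd_layer (g : List (List String)) (endP start : Int × Int) {L : Nat}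
    (hLm : pvMdist g start endP = some L) :
    (pvLV g endP start L).1.filter (fun f => f.1 == endP) =
      (pvEndFilter g start endP L).map (fun ds => (endP, pvStr ds)) := by
  have hsub : ∀ e ∈ (pvLV g endP start L).1, (e.1 == endP) = true →
      (pvMdist g start e.1 == some L) = true := by
    intro e _ he
    rw [beq_iff_eq] at he
    rw [beq_iff_eq, he]
    exact hLm
  rw [pvFilter_subsume hsub, pvGood g endP start hLm L (le_refl L), List.filter_map]
  unfold pvEndFilter pvGoodPaths
  rw [List.filter_filter]
  have hpred : ∀ ds ∈ pvAllP L,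
      ((((fun f => f.1 == endP) ∘ fun ds => (pvTrace start ds, pvStr ds)) ds) &&
        (pvValid g start ds && (pvMdist g start (pvTrace start ds) == some L))) =
      (pvValid g start ds && (pvTrace start ds == endP)) := by
    intro ds _
    simp only [Function.comp_def]
    by_cases ht : pvTrace start ds = endP
    · rw [ht, hLm]
      simp
    · have h1 : (pvTrace start ds == endP) = false := beq_eq_false_iff_ne.mpr ht
      rw [h1]
      simp
  rw [List.filter_congr hpred]
  apply List.map_congr_left
  intro ds hds
  rw [List.mem_filter, Bool.and_eq_true, beq_iff_eq] at hds
  rw [hds.2.2]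

lemma pvEndFilter_ne_nil (g : List (List String)) (start endP : Int × Int) {L : Nat}
    (hLm : pvMdist g start endP = some L) : pvEndFilter g start endP L ≠ [] := by
  obtain ⟨ds, hds, hv, ht⟩ := pvReach_iff.mp (pvMdist_spec hLm).1
  have : ds ∈ pvEndFilter g start endP L := by
    unfold pvEndFilter
    rw [List.mem_filter]
    exact ⟨hds, by rw [Bool.and_eq_true, beq_iff_eq]; exact ⟨hv, ht⟩⟩
  exact List.ne_nil_of_mem this

-- ---------- A side: relating the fuelled FIFO loop to layer processing ----------
def pvOutStep (endP : Int × Int) (st : List String × Option Int)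
    (e : (Int × Int) × String) : List String × Option Int :=
  if e.1 = endP then
    match st.2 with
    | none => ([e.2 ++ "A"], some (PySem.Str.len e.2))
    | some m =>
      if PySem.Str.len e.2 < m then ([e.2 ++ "A"], some (PySem.Str.len e.2))
      else if PySem.Str.len e.2 = m then (st.1 ++ [e.2 ++ "A"], st.2)
      else st
  else st

def pvSumFrom (g : List (List String)) (endP start : Int × Int) (k : Nat) : Nat :=
  ((List.range' k (pvRC g + 2 - k)).map (fun j => (pvLV g endP start j).1.length)).sum
def pvOutFrom (g : List (List String)) (endP start : Int × Int) (k : Nat)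
    (st : List String × Option Int) : List String × Option Int :=
  (List.range' k (pvRC g + 2 - k)).foldl
    (fun st j => (pvLV g endP start j).1.foldl (pvOutStep endP) st) st

lemma pvRange'_peel {k n : Nat} (hk : k < n) :
    List.range' k (n - k) = k :: List.range' (k + 1) (n - (k + 1)) := by
  have : n - k = (n - (k + 1)) + 1 := by omega
  rw [this, List.range'_succ]
lemma pvSumFrom_peel (g : List (List String)) (endP start : Int × Int) {k : Nat}
    (hk : k < pvRC g + 2) :
    pvSumFrom g endP start k = (pvLV g endP start k).1.length + pvSumFrom g endP start (k + 1) := by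
  unfold pvSumFrom
  rw [pvRange'_peel hk, List.map_cons, List.sum_cons]
lemma pvSumFrom_high (g : List (List String)) (endP start : Int × Int) {k : Nat}
    (hk : pvRC g + 2 ≤ k) : pvSumFrom g endP start k = 0 := by
  unfold pvSumFrom
  rw [show pvRC g + 2 - k = 0 by omega]
  rfl
lemma pvOutFrom_peel (g : List (List String)) (endP start : Int × Int) (k : Nat)
    (st : List String × Option Int) :
    pvOutFrom g endP start k st =
      pvOutFrom g endP start (k + 1) ((pvLV g endP start k).1.foldl (pvOutStep endP) st) := by
  unfold pvOutFrom
  by_cases hk : k < pvRC g + 2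
  · rw [pvRange'_peel hk, List.foldl_cons]
  · rw [show pvRC g + 2 - k = 0 by omega, show pvRC g + 2 - (k + 1) = 0 by omega]
    rw [pvLayer_empty g endP start (by omega)]
    rfl

lemma gspLoop_cons (g : List (List String)) (endP : Int × Int) (f : Nat) (r c : Int)
    (path : String) (rest : List ((Int × Int) × String)) (visited : PySem.Set (Int × Int))
    (paths : List String) (minLen : Option Int) :
    gspLoop g endP (f + 1) (((r, c), path) :: rest) visited paths minLen =
    (if (r, c) = endP then
      match minLen with
      | none => gspLoop g endP f rest visited [path ++ "A"] (some (PySem.Str.len path))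
      | some m =>
        if PySem.Str.len path < m then
          gspLoop g endP f rest visited [path ++ "A"] (some (PySem.Str.len path))
        else if PySem.Str.len path = m then
          gspLoop g endP f rest visited (paths ++ [path ++ "A"]) minLen
        else
          gspLoop g endP f rest visited paths minLen
    else
      gspLoop g endP f
        (pvDirsA.foldl (fun q d =>
          let nr := r + d.2.1
          let nc := c + d.2.2
          if 0 ≤ nr ∧ nr < (g.length : Int) ∧ 0 ≤ nc ∧ nc < ((g.headD []).length : Int) then
            if ¬ PySem.Set.contains (PySem.Set.add visited (r, c)) (nr, nc) ∧
                PySem.List.pyGetD (PySem.List.pyGetD g nr []) nc "" ≠ "-" then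
              q ++ [((nr, nc), path ++ d.1)]
            else q
          else q) rest)
        (PySem.Set.add visited (r, c)) paths minLen) := rfl

lemma gspLoop_cons_end_none (g : List (List String)) (endP : Int × Int) (f : Nat) (r c : Int)
    (path : String) (rest : List ((Int × Int) × String)) (visited : PySem.Set (Int × Int))
    (paths : List String) (hend : (r, c) = endP) :
    gspLoop g endP (f + 1) (((r, c), path) :: rest) visited paths none =
      gspLoop g endP f rest visited [path ++ "A"] (some (PySem.Str.len path)) := by
  rw [gspLoop_cons, if_pos hend]
lemma gspLoop_cons_end_some (g : List (List String)) (endP : Int × Int) (f : Nat) (r c : Int)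
    (path : String) (rest : List ((Int × Int) × String)) (visited : PySem.Set (Int × Int))
    (paths : List String) (m : Int) (hend : (r, c) = endP) :
    gspLoop g endP (f + 1) (((r, c), path) :: rest) visited paths (some m) =
      (if PySem.Str.len path < m then
        gspLoop g endP f rest visited [path ++ "A"] (some (PySem.Str.len path))
      else if PySem.Str.len path = m then
        gspLoop g endP f rest visited (paths ++ [path ++ "A"]) (some m)
      else gspLoop g endP f rest visited paths (some m)) := by
  rw [gspLoop_cons, if_pos hend]
lemma gspLoop_cons_go (g : List (List String)) (endP : Int × Int) (f : Nat) (r c : Int)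
    (path : String) (rest : List ((Int × Int) × String)) (visited : PySem.Set (Int × Int))
    (paths : List String) (minLen : Option Int) (hend : ¬ (r, c) = endP) :
    gspLoop g endP (f + 1) (((r, c), path) :: rest) visited paths minLen =
      gspLoop g endP f
        (pvDirsA.foldl (fun q d =>
          let nr := r + d.2.1
          let nc := c + d.2.2
          if 0 ≤ nr ∧ nr < (g.length : Int) ∧ 0 ≤ nc ∧ nc < ((g.headD []).length : Int) then
            if ¬ PySem.Set.contains (PySem.Set.add visited (r, c)) (nr, nc) ∧
                PySem.List.pyGetD (PySem.List.pyGetD g nr []) nc "" ≠ "-" then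
              q ++ [((nr, nc), path ++ d.1)]
            else q
          else q) rest)
        (PySem.Set.add visited (r, c)) paths minLen := by
  rw [gspLoop_cons, if_neg hend]

lemma pvGrind (g : List (List String)) (endP start : Int × Int) :
    ∀ (N fuel k : Nat) (pre suf : List ((Int × Int) × String)) (acc : List String)
      (minL : Option Int),
      fuel + (pvRC g + 3 - k) ≤ N →
      (pvLV g endP start k).1 = pre ++ suf →
      suf.length + pvSumFrom g endP start (k + 1) ≤ fuel →
      gspLoop g endP fuel
        (suf ++ (pre.foldl (pvExpand g endP) ([], (pvLV g endP start k).2)).1)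
        (pre.foldl (pvExpand g endP) ([], (pvLV g endP start k).2)).2 acc minL
      = (pvOutFrom g endP start (k + 1) (suf.foldl (pvOutStep endP) (acc, minL))).1 := by
  intro N
  induction N using Nat.strong_induction_on with
  | _ N ihN =>
  intro fuel k pre suf acc minL hN hsplit hfuel
  cases suf with
  | nil =>
      rw [List.append_nil] at hsplit
      by_cases hkRC : pvRC g + 2 ≤ k
      · -- everything from here on is empty
        have hlk : (pvLV g endP start k).1 = [] := pvLayer_empty g endP start (by omega)
        have hpre : pre = [] := by rw [hlk] at hsplit; exact hsplit.symm
        subst hpre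
        have hq : (([] : List ((Int × Int) × String)).foldl (pvExpand g endP)
            ([], (pvLV g endP start k).2)).1 = [] := rfl
        rw [List.nil_append, hq]
        have hout : pvOutFrom g endP start (k + 1)
            (([] : List ((Int × Int) × String)).foldl (pvOutStep endP) (acc, minL)) =
            (acc, minL) := by
          unfold pvOutFrom
          rw [show pvRC g + 2 - (k + 1) = 0 by omega]
          rfl
        rw [hout]
        cases fuel with
        | zero => rfl
        | succ f => rfl
      · -- shift to the next layer
        have hnext1 : (pre.foldl (pvExpand g endP) ([], (pvLV g endP start k).2)).1 =
            (pvLV g endP start (k + 1)).1 := by rw [← hsplit]; rfl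
        have hnext2 : (pre.foldl (pvExpand g endP) ([], (pvLV g endP start k).2)).2 =
            (pvLV g endP start (k + 1)).2 := by rw [← hsplit]; rfl
        rw [List.nil_append, hnext1, hnext2]
        have hb : (pvLV g endP start (k + 1)).1.length + pvSumFrom g endP start (k + 1 + 1) ≤ fuel := by
          by_cases h2 : k + 1 < pvRC g + 2
          · have hsum := pvSumFrom_peel g endP start (k := k + 1) h2
            simp only [List.length_nil] at hfuel
            omega
          · have h3 : (pvLV g endP start (k + 1)).1 = [] :=
              pvLayer_empty g endP start (by omega)
            have h4 := pvSumFrom_high g endP start (k := k + 1 + 1) (by omega)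
            rw [h3, h4]
            simp
        have happ := ihN (fuel + (pvRC g + 3 - (k + 1))) (by omega) fuel (k + 1) []
          (pvLV g endP start (k + 1)).1 acc minL (by omega) (by rw [List.nil_append]) hb
        rw [show (([] : List ((Int × Int) × String)).foldl (pvExpand g endP)
          ([], (pvLV g endP start (k + 1)).2)) = ([], (pvLV g endP start (k + 1)).2) from rfl] at happ
        rw [List.append_nil] at happ
        rw [happ]
        rw [show (([] : List ((Int × Int) × String)).foldl (pvOutStep endP) (acc, minL)) =
          (acc, minL) from rfl]
        rw [pvOutFrom_peel g endP start (k + 1) (acc, minL)]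
  | cons e suf' =>
      obtain ⟨⟨r, c⟩, path⟩ := e
      cases fuel with
      | zero =>
          exfalso
          rw [List.length_cons] at hfuel
          omega
      | succ f =>
          have hsplit' : (pvLV g endP start k).1 = (pre ++ [((r, c), path)]) ++ suf' := by
            rw [hsplit, List.append_assoc]
            rfl
          have hNf : f + (pvRC g + 3 - k) ≤ N - 1 := by omega
          have hfuel' : suf'.length + pvSumFrom g endP start (k + 1) ≤ f := by
            rw [List.length_cons] at hfuel
            omega
          rw [List.cons_append]
          by_cases hend : (r, c) = endP
          · have hfold : ((pre ++ [((r, c), path)]).foldl (pvExpand g endP)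
                ([], (pvLV g endP start k).2)) =
                (pre.foldl (pvExpand g endP) ([], (pvLV g endP start k).2)) := by
              rw [List.foldl_append]
              exact pvExpand_end hend
            have hout : (((r, c), path) :: suf').foldl (pvOutStep endP) (acc, minL) =
                suf'.foldl (pvOutStep endP) (pvOutStep endP (acc, minL) ((r, c), path)) := rfl
            rw [hout]
            cases minL with
            | none =>
                rw [gspLoop_cons_end_none g endP f r c path _ _ _ hend]
                have hstep : pvOutStep endP (acc, none) ((r, c), path) =
                    ([path ++ "A"], some (PySem.Str.len path)) := by
                  unfold pvOutStep
                  rw [if_pos hend]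
                rw [hstep]
                have := ihN (N - 1) (by omega) f k (pre ++ [((r, c), path)]) suf'
                  [path ++ "A"] (some (PySem.Str.len path)) hNf hsplit' hfuel'
                rw [hfold] at this
                exact this
            | some m =>
                rw [gspLoop_cons_end_some g endP f r c path _ _ _ m hend]
                by_cases h1 : PySem.Str.len path < m
                · rw [if_pos h1]
                  have hstep : pvOutStep endP (acc, some m) ((r, c), path) =
                      ([path ++ "A"], some (PySem.Str.len path)) := by
                    unfold pvOutStep
                    rw [if_pos hend]
                    rw [show ((match (some m : Option Int) with
                      | none => ([path ++ "A"], some (PySem.Str.len path))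
                      | some m =>
                        if PySem.Str.len path < m then ([path ++ "A"], some (PySem.Str.len path))
                        else if PySem.Str.len path = m then (acc ++ [path ++ "A"], some m)
                        else (acc, some m)) : List String × Option Int) =
                      (if PySem.Str.len path < m then ([path ++ "A"], some (PySem.Str.len path))
                       else if PySem.Str.len path = m then (acc ++ [path ++ "A"], some m)
                       else (acc, some m)) from rfl, if_pos h1]
                  rw [hstep]
                  have := ihN (N - 1) (by omega) f k (pre ++ [((r, c), path)]) suf'
                    [path ++ "A"] (some (PySem.Str.len path)) hNf hsplit' hfuel'
                  rw [hfold] at this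
                  exact this
                · rw [if_neg h1]
                  by_cases h2 : PySem.Str.len path = m
                  · rw [if_pos h2]
                    have hstep : pvOutStep endP (acc, some m) ((r, c), path) =
                        (acc ++ [path ++ "A"], some m) := by
                      unfold pvOutStep
                      rw [if_pos hend]
                      rw [show ((match (some m : Option Int) with
                        | none => ([path ++ "A"], some (PySem.Str.len path))
                        | some m =>
                          if PySem.Str.len path < m then ([path ++ "A"], some (PySem.Str.len path))
                          else if PySem.Str.len path = m then (acc ++ [path ++ "A"], some m)
                          else (acc, some m)) : List String × Option Int) =
                        (if PySem.Str.len path < m then ([path ++ "A"], some (PySem.Str.len path))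
                         else if PySem.Str.len path = m then (acc ++ [path ++ "A"], some m)
                         else (acc, some m)) from rfl, if_neg h1, if_pos h2]
                    rw [hstep]
                    have := ihN (N - 1) (by omega) f k (pre ++ [((r, c), path)]) suf'
                      (acc ++ [path ++ "A"]) (some m) hNf hsplit' hfuel'
                    rw [hfold] at this
                    exact this
                  · rw [if_neg h2]
                    have hstep : pvOutStep endP (acc, some m) ((r, c), path) = (acc, some m) := by
                      unfold pvOutStep
                      rw [if_pos hend]
                      rw [show ((match (some m : Option Int) with
                        | none => ([path ++ "A"], some (PySem.Str.len path))
                        | some m =>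
                          if PySem.Str.len path < m then ([path ++ "A"], some (PySem.Str.len path))
                          else if PySem.Str.len path = m then (acc ++ [path ++ "A"], some m)
                          else (acc, some m)) : List String × Option Int) =
                        (if PySem.Str.len path < m then ([path ++ "A"], some (PySem.Str.len path))
                         else if PySem.Str.len path = m then (acc ++ [path ++ "A"], some m)
                         else (acc, some m)) from rfl, if_neg h1, if_neg h2]
                    rw [hstep]
                    have := ihN (N - 1) (by omega) f k (pre ++ [((r, c), path)]) suf'
                      acc (some m) hNf hsplit' hfuel'
                    rw [hfold] at this
                    exact this
          · rw [gspLoop_cons_go g endP f r c path _ _ _ _ hend]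
            have hq := pvQueue'_eq g r c path
              (suf' ++ (pre.foldl (pvExpand g endP) ([], (pvLV g endP start k).2)).1)
              (PySem.Set.add (pre.foldl (pvExpand g endP) ([], (pvLV g endP start k).2)).2 (r, c))
            rw [hq, List.append_assoc]
            have hfold : ((pre ++ [((r, c), path)]).foldl (pvExpand g endP)
                ([], (pvLV g endP start k).2)) =
                ((pre.foldl (pvExpand g endP) ([], (pvLV g endP start k).2)).1 ++
                  pvPush g (PySem.Set.add
                    (pre.foldl (pvExpand g endP) ([], (pvLV g endP start k).2)).2 (r, c))
                    ((r, c), path),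
                 PySem.Set.add
                   (pre.foldl (pvExpand g endP) ([], (pvLV g endP start k).2)).2 (r, c)) := by
              rw [List.foldl_append]
              exact pvExpand_go hend
            have hout : (((r, c), path) :: suf').foldl (pvOutStep endP) (acc, minL) =
                suf'.foldl (pvOutStep endP) (acc, minL) := by
              rw [List.foldl_cons]
              congr 1
              unfold pvOutStep
              rw [if_neg hend]
            rw [hout]
            have := ihN (N - 1) (by omega) f k (pre ++ [((r, c), path)]) suf' acc minL
              hNf hsplit' hfuel'
            rw [hfold] at this
            exact this

-- ---------- fuel sufficiency and the characterization of get_shortest_path ----------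
lemma pvPow_sum (n : Nat) : ((List.range n).map (fun j => 4 ^ j)).sum < 4 ^ n := by
  induction n with
  | zero => simp
  | succ n ih =>
      rw [List.range_succ, List.map_append, List.sum_append]
      simp only [List.map_cons, List.map_nil, List.sum_cons, List.sum_nil]
      have : 4 ^ (n + 1) = 4 * 4 ^ n := by ring
      omega
lemma pvFuel_ok (g : List (List String)) (endP start : Int × Int) :
    1 + pvSumFrom g endP start 1 ≤ 4 ^ (pvRC g + 2) + 1 := by
  have hpeel := pvSumFrom_peel g endP start (k := 0) (by omega)
  rw [show (0 : Nat) + 1 = 1 from rfl] at hpeel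
  have hlay0 : (pvLV g endP start 0).1.length = 1 := rfl
  have hle : pvSumFrom g endP start 0 ≤ ((List.range (pvRC g + 2)).map (fun j => 4 ^ j)).sum := by
    unfold pvSumFrom
    rw [show pvRC g + 2 - 0 = pvRC g + 2 by omega, ← List.range_eq_range']
    exact List.sum_le_sum (fun j _ => pvLayer_size g endP start j)
  have := pvPow_sum (pvRC g + 2)
  omega

lemma gsp_eq_out (g : List (List String)) (start endP : Int × Int) :
    get_shortest_path start endP g = (pvOutFrom g endP start 0 ([], none)).1 := by
  unfold get_shortest_path
  have h0 : (pvLV g endP start 0).1 = [] ++ [(start, "")] := rfl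
  have hgr := pvGrind g endP start
    ((4 ^ (g.length * (g.headD []).length + 2) + 1) + (pvRC g + 3))
    (4 ^ (g.length * (g.headD []).length + 2) + 1) 0 [] [(start, "")] [] none
    (le_refl _) h0
    (by
      show [(start, "")].length + pvSumFrom g endP start 1 ≤ _
      rw [List.length_cons, List.length_nil]
      have := pvFuel_ok g endP start
      have hrc : g.length * (g.headD []).length = pvRC g := rfl
      rw [hrc]
      omega)
  rw [show (([] : List ((Int × Int) × String)).foldl (pvExpand g endP)
    ([], (pvLV g endP start 0).2)) = ([], (pvLV g endP start 0).2) from rfl] at hgr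
  rw [List.append_nil] at hgr
  rw [show (pvLV g endP start 0).2 = PySem.Set.empty from rfl] at hgr
  rw [hgr]
  rw [pvOutFrom_peel g endP start 0 ([], none)]
  rfl

-- string lengths of path entries
lemma pvStrLen (ds : List (String × Int × Int)) (h : ∀ d ∈ ds, d ∈ pvDirsA) :
    PySem.Str.len (pvStr ds) = (ds.length : Int) := by
  induction ds with
  | nil => decide
  | cons d ds ih =>
      have hd1 : PySem.Str.len d.1 = 1 := by
        have : ∀ e ∈ pvDirsA, PySem.Str.len e.1 = 1 := by decide
        exact this d (h d (by simp))
      show PySem.Str.len (d.1 ++ pvStr ds) = _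
      rw [PySem.Str.len_append, hd1, ih (fun e he => h e (by simp [he])), List.length_cons]
      push_cast
      ring
lemma pvEntry_len (g : List (List String)) (endP start : Int × Int) (k : Nat) :
    ∀ e ∈ (pvLV g endP start k).1, PySem.Str.len e.2 = (k : Int) := by
  intro e he
  obtain ⟨ds, hds, _, _, hs, _, _⟩ := (pvLayerInv g endP start k).1 e he
  obtain ⟨hlen, hdirs⟩ := mem_pvAllP.mp hds
  rw [← hs, pvStrLen ds hdirs, hlen]

lemma pvOutStep_noend {endP : Int × Int} {st : List String × Option Int}
    {e : (Int × Int) × String} (h : e.1 ≠ endP) : pvOutStep endP st e = st := by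
  unfold pvOutStep
  rw [if_neg h]
lemma pvFold_skip {endP : Int × Int} :
    ∀ (es : List ((Int × Int) × String)), (∀ e ∈ es, e.1 ≠ endP) →
      ∀ (st : List String × Option Int), es.foldl (pvOutStep endP) st = st := by
  intro es
  induction es with
  | nil => intro _ st; rfl
  | cons e es ih =>
      intro h st
      rw [List.foldl_cons, pvOutStep_noend (h e (by simp))]
      exact ih (fun f hf => h f (by simp [hf])) st
lemma pvLayer_noend {g : List (List String)} {endP start : Int × Int} {k : Nat}
    (h : ∀ j, j ≤ k → pvReach g start endP j = false) :
    ∀ e ∈ (pvLV g endP start k).1, e.1 ≠ endP := by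
  intro e he heq
  obtain ⟨ds, hds, hv, ht, _, _, _⟩ := (pvLayerInv g endP start k).1 e he
  have : pvReach g start endP k = true := pvReach_iff.mpr ⟨ds, hds, hv, by rw [ht, heq]⟩
  rw [h k (le_refl k)] at this
  exact Bool.false_ne_true this

lemma pvFold_filter_end {endP : Int × Int} :
    ∀ (es : List ((Int × Int) × String)) (st : List String × Option Int),
      es.foldl (pvOutStep endP) st =
        (es.filter (fun e => e.1 == endP)).foldl (pvOutStep endP) st := by
  intro es
  induction es with
  | nil => intro st; rfl
  | cons e es ih =>
      intro st
      by_cases he : e.1 = endP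
      · rw [List.foldl_cons, List.filter_cons_of_pos (by rw [beq_iff_eq]; exact he),
          List.foldl_cons]
        exact ih _
      · rw [List.foldl_cons, pvOutStep_noend he,
          List.filter_cons_of_neg (by rw [beq_eq_false_iff_ne.mpr he]; simp)]
        exact ih _

lemma pvFoldEnd_go {endP : Int × Int} {L : Nat} :
    ∀ (es : List ((Int × Int) × String)),
      (∀ e ∈ es, e.1 = endP ∧ PySem.Str.len e.2 = (L : Int)) →
      ∀ (accl : List String),
      es.foldl (pvOutStep endP) (accl, some (L : Int)) =
        (accl ++ es.map (fun e => e.2 ++ "A"), some (L : Int)) := by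
  intro es
  induction es with
  | nil => intro _ accl; simp
  | cons e es ih =>
      intro h accl
      obtain ⟨he, hlen⟩ := h e (by simp)
      rw [List.foldl_cons]
      have hstep : pvOutStep endP (accl, some (L : Int)) e = (accl ++ [e.2 ++ "A"], some (L : Int)) := by
        unfold pvOutStep
        rw [if_pos he]
        show (if PySem.Str.len e.2 < (L : Int) then _
          else if PySem.Str.len e.2 = (L : Int) then _ else _) = _
        rw [hlen, if_neg (lt_irrefl _), if_pos rfl]
      rw [hstep, ih (fun f hf => h f (by simp [hf])) (accl ++ [e.2 ++ "A"])]
      simp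
lemma pvFoldEnd {endP : Int × Int} {L : Nat} (es : List ((Int × Int) × String))
    (hne : es ≠ []) (h : ∀ e ∈ es, e.1 = endP ∧ PySem.Str.len e.2 = (L : Int)) :
    es.foldl (pvOutStep endP) ([], none) =
      (es.map (fun e => e.2 ++ "A"), some (L : Int)) := by
  cases es with
  | nil => exact absurd rfl hne
  | cons e es =>
      obtain ⟨he, hlen⟩ := h e (by simp)
      rw [List.foldl_cons]
      have hstep : pvOutStep endP ([], none) e = ([e.2 ++ "A"], some (L : Int)) := by
        unfold pvOutStep
        rw [if_pos he]
        show ([e.2 ++ "A"], some (PySem.Str.len e.2)) = _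
        rw [hlen]
      rw [hstep, pvFoldEnd_go es (fun f hf => h f (by simp [hf])) [e.2 ++ "A"]]
      simp

lemma pvLayerFold_L (g : List (List String)) (endP start : Int × Int) {L : Nat}
    (hLm : pvMdist g start endP = some L) :
    (pvLV g endP start L).1.foldl (pvOutStep endP) ([], none) =
      ((pvEndFilter g start endP L).map (fun ds => pvStr ds ++ "A"), some (L : Int)) := by
  rw [pvFold_filter_end, pvEnd_layer g endP start hLm]
  rw [pvFoldEnd _ (by
      intro hnil
      apply pvEndFilter_ne_nil g start endP hLm
      rcases h : pvEndFilter g start endP L with _ | _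
      · rfl
      · rw [h] at hnil; simp at hnil)
    (by
      intro e he
      rw [List.mem_map] at he
      obtain ⟨ds, hds, rfl⟩ := he
      refine ⟨rfl, ?_⟩
      unfold pvEndFilter at hds
      rw [List.mem_filter] at hds
      obtain ⟨hlen, hdirs⟩ := mem_pvAllP.mp hds.1
      show PySem.Str.len (pvStr ds) = _
      rw [pvStrLen ds hdirs, hlen])]
  rw [List.map_map]
  rfl

lemma pvLayerFold_gt (g : List (List String)) (endP start : Int × Int) {L j : Nat}
    (hj : L < j) (res : List String) :
    (pvLV g endP start j).1.foldl (pvOutStep endP) (res, some (L : Int)) =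
      (res, some (L : Int)) := by
  have hlen := pvEntry_len g endP start j
  revert hlen
  generalize (pvLV g endP start j).1 = es
  intro hlen
  induction es generalizing res with
  | nil => rfl
  | cons e es ih =>
      rw [List.foldl_cons]
      have hstep : pvOutStep endP (res, some (L : Int)) e = (res, some (L : Int)) := by
        by_cases he : e.1 = endP
        · unfold pvOutStep
          rw [if_pos he]
          show (if PySem.Str.len e.2 < (L : Int) then _
            else if PySem.Str.len e.2 = (L : Int) then _ else _) = _
          rw [hlen e (by simp), if_neg (by push_cast; omega), if_neg (by
            push_cast
            intro hc
            have : j = L := by exact_mod_cast hc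
            omega)]
        · exact pvOutStep_noend he
      rw [hstep]
      exact ih res (fun f hf => hlen f (by simp [hf]))

lemma pvOut_char (g : List (List String)) (endP start : Int × Int) :
    (pvOutFrom g endP start 0 ([], none)).1 =
      (match pvMdist g start endP with
       | none => []
       | some L => (pvEndFilter g start endP L).map (fun ds => pvStr ds ++ "A")) := by
  cases hLm : pvMdist g start endP with
  | none =>
      have hnr : ∀ j, pvReach g start endP j = false := pvMdist_none_iff.mp hLm
      unfold pvOutFrom
      have : ∀ (js : List Nat) (st : List String × Option Int),
          js.foldl (fun st j => (pvLV g endP start j).1.foldl (pvOutStep endP) st) st = st := by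
        intro js
        induction js with
        | nil => intro st; rfl
        | cons j js ih =>
            intro st
            rw [List.foldl_cons, pvFold_skip _ (pvLayer_noend (fun i _ => hnr i)) st]
            exact ih st
      rw [this]
  | some L =>
      have hLRC : L ≤ pvRC g := pvMdist_le_RC hLm
      have hmin := (pvMdist_spec hLm).2.2
      unfold pvOutFrom
      have hsplit : List.range' 0 (pvRC g + 2 - 0) =
          List.range' 0 L ++ List.range' L (pvRC g + 2 - L) := by
        rw [show pvRC g + 2 - 0 = L + (pvRC g + 2 - L) by omega]
        have := List.range'_append (s := 0) (m := L) (n := pvRC g + 2 - L) (step := 1)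
        rw [show 0 + 1 * L = L by omega] at this
        exact this.symm
      rw [hsplit, List.foldl_append]
      have hfirst : (List.range' 0 L).foldl
          (fun st j => (pvLV g endP start j).1.foldl (pvOutStep endP) st) ([], none) =
          ([], none) := by
        have : ∀ (js : List Nat), (∀ j ∈ js, j < L) →
            ∀ st, js.foldl (fun st j => (pvLV g endP start j).1.foldl (pvOutStep endP) st) st
              = st := by
          intro js
          induction js with
          | nil => intro _ st; rfl
          | cons j js ih =>
              intro hjs st
              rw [List.foldl_cons,
                pvFold_skip _ (pvLayer_noend (fun i hi => hmin i (by
                  have := hjs j (by simp)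
                  omega))) st]
              exact ih (fun i hi => hjs i (by simp [hi])) st
        exact this _ (fun j hj => by have := (List.mem_range'_1.mp hj).2; omega) _
      rw [hfirst]
      rw [pvRange'_peel (show L < pvRC g + 2 by omega), List.foldl_cons]
      rw [pvLayerFold_L g endP start hLm]
      have hrest : ∀ (js : List Nat), (∀ j ∈ js, L < j) →
          ∀ res, js.foldl (fun st j => (pvLV g endP start j).1.foldl (pvOutStep endP) st)
            (res, some (L : Int)) = (res, some (L : Int)) := by
        intro js
        induction js with
        | nil => intro _ _; rfl
        | cons j js ih =>
            intro hjs res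
            rw [List.foldl_cons, pvLayerFold_gt g endP start (hjs j (by simp)) res]
            exact ih (fun i hi => hjs i (by simp [hi])) res
      rw [hrest _ (fun j hj => by
        have := (List.mem_range'_1.mp hj).1
        omega) _]

-- ---------- outer loop: symbol scan / indexing pass, index loop = pair list ----------
def pvItems (g : List (List String)) : List (String × (Int × Int)) :=
  (List.range g.length).flatMap (fun (r : Nat) => (List.range (pvCols g)).map (fun (c : Nat) =>
    (pvCell g ((r : Int), (c : Int)), ((r : Int), (c : Int)))))
def pvItemStepS (S : String) (a : Int × Int) (it : String × (Int × Int)) : Int × Int :=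
  if it.1 = S then it.2 else a
def pvPl : List Char → String → List (String × String)
  | [], _ => []
  | c :: cs, p => (p, String.mk [c]) :: pvPl cs (String.mk [c])
def pvComb (g : List (List String)) (seqs : List String) (S E : String) : List String :=
  seqs.flatMap (fun s =>
    (get_shortest_path ((pvItems g).foldl (pvItemStepS S) (0, 0))
      ((pvItems g).foldl (pvItemStepS E) (0, 0)) g).map (fun path => s ++ path))
def pvSexpr (code : String) (i : Int) : String :=
  if i = -1 then "A" else ((PySem.Str.pyGet? code i).map (fun c => String.mk [c])).getD ""
def pvEexpr (code : String) (i : Int) : String :=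
  ((PySem.Str.pyGet? code (i + 1)).map (fun c => String.mk [c])).getD ""

lemma pvScanFold (g : List (List String)) (S E : String) :
    (PySem.List.pyRange 0 (g.length : Int) 1).foldl (fun se row =>
      (PySem.List.pyRange 0 ((g.headD []).length : Int) 1).foldl (fun se col =>
        ((if PySem.List.pyGetD (PySem.List.pyGetD g row []) col "" = S then (row, col) else se.1),
         (if PySem.List.pyGetD (PySem.List.pyGetD g row []) col "" = E then (row, col) else se.2))) se)
      (((0 : Int), (0 : Int)), ((0 : Int), (0 : Int)))
    = ((pvItems g).foldl (pvItemStepS S) (0, 0), (pvItems g).foldl (pvItemStepS E) (0, 0)) := by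
  rw [PySem.List.pyRange_zero_natCast g.length, List.foldl_map]
  have hconv : (List.range g.length).foldl (fun se (r : Nat) =>
      (PySem.List.pyRange 0 ((g.headD []).length : Int) 1).foldl (fun se col =>
        ((if PySem.List.pyGetD (PySem.List.pyGetD g (r : Int) []) col "" = S then ((r : Int), col) else se.1),
         (if PySem.List.pyGetD (PySem.List.pyGetD g (r : Int) []) col "" = E then ((r : Int), col) else se.2))) se)
      (((0 : Int), (0 : Int)), ((0 : Int), (0 : Int)))
      = (pvItems g).foldl (fun se it => (pvItemStepS S se.1 it, pvItemStepS E se.2 it))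
        (((0 : Int), (0 : Int)), ((0 : Int), (0 : Int))) := by
    unfold pvItems
    rw [List.foldl_flatMap]
    apply PySem.List.foldl_congr_mem
    intro b r _
    rw [show ((g.headD []).length : Int) = ((pvCols g : Nat) : Int) from rfl,
      PySem.List.pyRange_zero_natCast (pvCols g), List.foldl_map, List.foldl_map]
    rfl
  rw [hconv, PySem.List.foldl_prod_mk (pvItemStepS S) (pvItemStepS E)]

-- ---------- B's single indexing pass builds the location dict and the open-cell set ----------
def pvCellStep (s : PySem.Set (Int × Int)) (it : String × (Int × Int)) : PySem.Set (Int × Int) :=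
  if it.1 ≠ "-" then PySem.Set.add s it.2 else s
def pvCellsOf (g : List (List String)) : PySem.Set (Int × Int) :=
  (pvItems g).foldl pvCellStep PySem.Set.empty
def pvLocOf (g : List (List String)) : PySem.Dict String (Int × Int) :=
  (pvItems g).foldl (fun d it => PySem.Dict.insert d it.1 it.2) PySem.Dict.empty

lemma pvRowItems (g : List (List String)) (r : Nat)
    (hlen : pvCols g ≤ (g.getD r []).length) :
    PySem.List.enumerate (PySem.List.slice (PySem.List.pyGetD g (r : Int) []) none
        (some ((pvCols g : Nat) : Int)))
      = (List.range (pvCols g)).map (fun (c : Nat) =>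
          ((c : Int), pvCell g ((r : Int), (c : Int)))) := by
  rw [PySem.List.pyGetD_natCast, PySem.List.slice_to_natCast]
  have htk : ((g.getD r []).take (pvCols g)).length = pvCols g := by
    rw [List.length_take]
    omega
  rw [PySem.List.enumerate_eq_map_pyRange _ "",
    show PySem.List.len ((g.getD r []).take (pvCols g)) = ((pvCols g : Nat) : Int) by
      show (((g.getD r []).take (pvCols g)).length : Int) = _
      rw [htk],
    PySem.List.pyRange_zero_natCast, List.map_map]
  apply List.map_congr_left
  intro c hc
  rw [List.mem_range] at hc
  show ((c : Int), PySem.List.pyGetD ((g.getD r []).take (pvCols g)) (c : Int) "") = _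
  rw [PySem.List.pyGetD_natCast]
  have hct : c < ((g.getD r []).take (pvCols g)).length := by omega
  have hcr : c < (g.getD r []).length := by omega
  have h1 : ((g.getD r []).take (pvCols g)).getD c "" = (g.getD r []).getD c "" := by
    rw [List.getD_eq_getElem _ _ hct, List.getD_eq_getElem _ _ hcr]
    exact List.getElem_take
  rw [h1]
  show _ = ((c : Int), PySem.List.pyGetD (PySem.List.pyGetD g (r : Int) []) (c : Int) "")
  rw [PySem.List.pyGetD_natCast, PySem.List.pyGetD_natCast]

lemma pvBuildFold (g : List (List String))
    (hP : ∀ row ∈ g, pvCols g ≤ row.length) :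
    (PySem.List.enumerate g).foldl
      (fun (lc : PySem.Dict String (Int × Int) × PySem.Set (Int × Int)) rrow =>
        (PySem.List.enumerate (PySem.List.slice rrow.2 none
            (some (((g.headD []).length : Int))))).foldl
          (fun lc cv =>
            (lc.1.insert cv.2 (rrow.1, cv.1),
             if cv.2 ≠ "-" then PySem.Set.add lc.2 (rrow.1, cv.1) else lc.2)) lc)
      (PySem.Dict.empty, PySem.Set.empty)
    = (pvLocOf g, pvCellsOf g) := by
  have hRHS : (pvLocOf g, pvCellsOf g) =
      (pvItems g).foldl (fun lc it =>
        (PySem.Dict.insert lc.1 it.1 it.2, pvCellStep lc.2 it))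
        (PySem.Dict.empty, PySem.Set.empty) := by
    rw [PySem.List.foldl_prod_mk (fun d (it : String × (Int × Int)) =>
      PySem.Dict.insert d it.1 it.2) pvCellStep]
    rfl
  rw [hRHS]
  unfold pvItems
  rw [List.foldl_flatMap]
  rw [PySem.List.enumerate_eq_map_pyRange _ ([] : List String),
    show PySem.List.len g = ((g.length : Nat) : Int) from rfl,
    PySem.List.pyRange_zero_natCast, List.map_map, List.foldl_map]
  apply PySem.List.foldl_congr_mem
  intro lc r hr
  rw [List.mem_range] at hr
  have hrow : pvCols g ≤ (g.getD r []).length := by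
    have : g.getD r [] ∈ g := by
      rw [List.getD_eq_getElem _ _ hr]
      exact List.getElem_mem hr
    exact hP _ this
  show (PySem.List.enumerate (PySem.List.slice (PySem.List.pyGetD g (r : Int) []) none
      (some (((g.headD []).length : Int))))).foldl _ lc = _
  rw [show (((g.headD []).length : Int)) = ((pvCols g : Nat) : Int) from rfl,
    pvRowItems g r hrow, List.foldl_map, List.foldl_map]
  apply PySem.List.foldl_congr_mem
  intro lc' c _
  rfl

lemma pvMem_cellStep_fold (x : Int × Int) :
    ∀ (l : List (String × (Int × Int))) (s0 : PySem.Set (Int × Int)),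
      x ∈ l.foldl pvCellStep s0 ↔ x ∈ s0 ∨ ∃ it ∈ l, it.1 ≠ "-" ∧ x = it.2 := by
  intro l
  induction l with
  | nil => intro s0; simp
  | cons it l ih =>
      intro s0
      rw [List.foldl_cons]
      by_cases hd : it.1 ≠ "-"
      · rw [show pvCellStep s0 it = PySem.Set.add s0 it.2 by unfold pvCellStep; rw [if_pos hd], ih]
        rw [PySem.Set.mem_add]
        constructor
        · rintro ((h | rfl) | ⟨f, hf, h1, h2⟩)
          · exact Or.inl h
          · exact Or.inr ⟨it, by simp, hd, rfl⟩
          · exact Or.inr ⟨f, by simp [hf], h1, h2⟩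
        · rintro (h | ⟨f, hf, h1, h2⟩)
          · exact Or.inl (Or.inl h)
          · rcases List.mem_cons.mp hf with rfl | hf'
            · exact Or.inl (Or.inr h2)
            · exact Or.inr ⟨f, hf', h1, h2⟩
      · rw [show pvCellStep s0 it = s0 by unfold pvCellStep; rw [if_neg hd], ih]
        constructor
        · rintro (h | ⟨f, hf, h1, h2⟩)
          · exact Or.inl h
          · exact Or.inr ⟨f, by simp [hf], h1, h2⟩
        · rintro (h | ⟨f, hf, h1, h2⟩)
          · exact Or.inl h
          · rcases List.mem_cons.mp hf with rfl | hf'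
            · exact absurd h1 (by simpa using hd)
            · exact Or.inr ⟨f, hf', h1, h2⟩

lemma pvMem_items {g : List (List String)} {it : String × (Int × Int)} :
    it ∈ pvItems g ↔ ∃ r, r < g.length ∧ ∃ c, c < pvCols g ∧
      it = (pvCell g ((r : Int), (c : Int)), ((r : Int), (c : Int))) := by
  unfold pvItems
  simp only [List.mem_flatMap, List.mem_map, List.mem_range]
  constructor
  · rintro ⟨r, hr, c, hc, rfl⟩
    exact ⟨r, hr, c, hc, rfl⟩
  · rintro ⟨r, hr, c, hc, rfl⟩
    exact ⟨r, hr, c, hc, rfl⟩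

lemma pvCells_char (g : List (List String)) :
    ∀ n : Int × Int, PySem.Set.contains (pvCellsOf g) n = true ↔ pvOk g n = true := by
  intro n
  rw [PySem.Set.contains_iff]
  unfold pvCellsOf
  rw [pvMem_cellStep_fold]
  constructor
  · rintro (h | ⟨it, hit, hne, rfl⟩)
    · exact absurd h (by simp [PySem.Set.empty])
    · obtain ⟨r, hr, c, hc, rfl⟩ := pvMem_items.mp hit
      show pvOk g ((r : Int), (c : Int)) = true
      unfold pvOk
      rw [decide_eq_true_eq]
      refine ⟨?_, ?_, ?_, ?_, hne⟩
      · show (0 : Int) ≤ (r : Int)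
        positivity
      · show (r : Int) < (g.length : Int)
        exact_mod_cast hr
      · show (0 : Int) ≤ (c : Int)
        positivity
      · show (c : Int) < ((pvCols g : Nat) : Int)
        exact_mod_cast hc
  · intro hok
    right
    have hok' := hok
    unfold pvOk at hok'
    rw [decide_eq_true_eq] at hok'
    obtain ⟨h1, h2, h3, h4, h5⟩ := hok'
    have hn : n = ((n.1.toNat : Int), (n.2.toNat : Int)) := by
      refine Prod.ext ?_ ?_ <;> simp <;> omega
    refine ⟨(pvCell g n, n), ?_, h5, rfl⟩
    refine pvMem_items.mpr ⟨n.1.toNat, by omega, n.2.toNat, by omega, ?_⟩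
    rw [← hn]

lemma pvDictLast (S : String) :
    ∀ (items : List (String × (Int × Int))) (d0 : PySem.Dict String (Int × Int)),
      (items.foldl (fun d it => PySem.Dict.insert d it.1 it.2) d0).getD S (0, 0) =
        items.foldl (pvItemStepS S) (d0.getD S (0, 0)) := by
  intro items
  induction items with
  | nil => intro d0; rfl
  | cons it items ih =>
      intro d0
      rw [List.foldl_cons, List.foldl_cons, ih]
      congr 1
      rw [PySem.Dict.getD_insert]
      unfold pvItemStepS
      by_cases h : S = it.1
      · rw [if_pos h, if_pos h.symm]
      · rw [if_neg h, if_neg (fun hh => h hh.symm)]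

lemma pvColsB_eq (g : List (List String)) :
    (if g = [] then (0 : Int) else ((g.headD []).length : Int)) = ((g.headD []).length : Int) := by
  cases g with
  | nil => simp
  | cons h t => simp

lemma pvBConv (C : List String → String → String → List String) :
    ∀ (cs : List Char) (prevS : String) (seqs : List String),
      (cs.foldl (fun (st : List String × String) ch =>
        (C st.1 st.2 (String.mk [ch]), String.mk [ch])) (seqs, prevS)).1
      = (pvPl cs prevS).foldl (fun seqs SE => C seqs SE.1 SE.2) seqs := by
  intro cs
  induction cs with
  | nil => intro prevS seqs; rfl
  | cons c cs ih =>
      intro prevS seqs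
      rw [List.foldl_cons]
      show (cs.foldl _ (C seqs prevS (String.mk [c]), String.mk [c])).1 = _
      rw [ih (String.mk [c]) (C seqs prevS (String.mk [c]))]
      rfl

lemma pvAGen (C : List String → String → String → List String) (cs : List Char) :
    ∀ (m k : Nat), k + m + 1 = cs.length → ∀ (seqs : List String),
      (List.range' k m).foldl (fun seqs t =>
        C seqs (String.mk [cs.getD t 'A']) (String.mk [cs.getD (t + 1) 'A'])) seqs
      = (pvPl (cs.drop (k + 1)) (String.mk [cs.getD k 'A'])).foldl
          (fun seqs SE => C seqs SE.1 SE.2) seqs := by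
  intro m
  induction m with
  | zero =>
      intro k hk seqs
      rw [show cs.drop (k + 1) = [] from List.drop_eq_nil_of_le (by omega)]
      rfl
  | succ m ih =>
      intro k hk seqs
      rw [List.range'_succ, List.foldl_cons]
      have hk1 : k + 1 < cs.length := by omega
      rw [List.drop_eq_getElem_cons hk1]
      rw [show pvPl (cs[k + 1] :: cs.drop (k + 1 + 1)) (String.mk [cs.getD k 'A']) =
        (String.mk [cs.getD k 'A'], String.mk [cs[k + 1]]) ::
          pvPl (cs.drop (k + 1 + 1)) (String.mk [cs[k + 1]]) from rfl]
      rw [List.foldl_cons]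
      have := ih (k + 1) (by omega)
        (C seqs (String.mk [cs.getD k 'A']) (String.mk [cs.getD (k + 1) 'A']))
      rw [List.getD_eq_getElem cs 'A' hk1] at this ⊢
      exact this

lemma pvA_canon (code : String) (g : List (List String)) :
    get_sequence code g =
      (pvPl code.toList "A").foldl (fun seqs SE => pvComb g seqs SE.1 SE.2) [""] := by
  simp only [get_sequence]
  rw [PySem.Str.len_eq code]
  refine Eq.trans (?_ : _ = (PySem.List.pyRange (-1) ((code.toList.length : Int) - 1) 1).foldl
      (fun seqs i => pvComb g seqs (pvSexpr code i) (pvEexpr code i)) [""]) ?_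
  · apply PySem.List.foldl_congr_mem
    intro acc i _
    unfold pvComb pvSexpr pvEexpr
    rw [pvScanFold g (if i = -1 then "A" else
        ((PySem.Str.pyGet? code i).map (fun c => String.mk [c])).getD "")
      (((PySem.Str.pyGet? code (i + 1)).map (fun c => String.mk [c])).getD "")]
  · cases hcs : code.toList with
    | nil =>
        rw [show ((([] : List Char).length : Int) - 1) = -1 by simp]
        rw [show PySem.List.pyRange (-1) (-1) 1 = [] from by decide]
        rfl
    | cons c cs' =>
        have hn : (-1 : Int) < ((c :: cs').length : Int) - 1 := by
          rw [List.length_cons]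
          push_cast
          omega
        rw [PySem.List.pyRange_one_cons hn, List.foldl_cons]
        rw [show (-1 : Int) + 1 = (0 : Int) by ring]
        rw [show (((c :: cs').length : Int) - 1) = ((cs'.length : Nat) : Int) by
          rw [List.length_cons]; push_cast; ring]
        rw [PySem.List.pyRange_zero_natCast cs'.length, List.foldl_map]
        have h1 : pvSexpr code (-1) = "A" := by
          unfold pvSexpr
          rw [if_pos rfl]
        have h2 : pvEexpr code (-1) = String.mk [c] := by
          unfold pvEexpr
          rw [show (-1 : Int) + 1 = ((0 : Nat) : Int) by ring, PySem.Str.pyGet?_natCast, hcs]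
          rfl
        have hfirst : pvComb g [""] (pvSexpr code (-1)) (pvEexpr code (-1)) =
            pvComb g [""] "A" (String.mk [c]) := by rw [h1, h2]
        rw [hfirst]
        refine Eq.trans (?_ : _ = (List.range cs'.length).foldl (fun seqs (t : Nat) =>
            pvComb g seqs (String.mk [(c :: cs').getD t 'A'])
              (String.mk [(c :: cs').getD (t + 1) 'A'])) (pvComb g [""] "A" (String.mk [c]))) ?_
        · apply PySem.List.foldl_congr_mem
          intro acc t ht
          rw [List.mem_range] at ht
          have ht1 : t < (c :: cs').length := by rw [List.length_cons]; omega
          have ht2 : t + 1 < (c :: cs').length := by rw [List.length_cons]; omega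
          have hS : pvSexpr code (t : Int) = String.mk [(c :: cs').getD t 'A'] := by
            unfold pvSexpr
            rw [if_neg (by omega), PySem.Str.pyGet?_natCast, hcs,
              List.getElem?_eq_getElem ht1, List.getD_eq_getElem _ 'A' ht1]
            rfl
          have hE : pvEexpr code (t : Int) = String.mk [(c :: cs').getD (t + 1) 'A'] := by
            unfold pvEexpr
            rw [show (t : Int) + 1 = ((t + 1 : Nat) : Int) by push_cast; ring,
              PySem.Str.pyGet?_natCast, hcs,
              List.getElem?_eq_getElem ht2, List.getD_eq_getElem _ 'A' ht2]
            rfl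
          rw [hS, hE]
        · rw [show List.range cs'.length = List.range' 0 cs'.length from List.range_eq_range']
          cases cs' with
          | nil => rfl
          | cons c2 cs'' =>
              have := pvAGen (pvComb g) (c :: c2 :: cs'') (c2 :: cs'').length 0
                (by simp) (pvComb g [""] "A" (String.mk [c]))
              rw [show List.drop (0 + 1) (c :: c2 :: cs'') = c2 :: cs'' from rfl] at this
              rw [show List.getD (c :: c2 :: cs'') 0 'A' = c from rfl] at this
              rw [this]
              rfl

lemma pvB_canon (code : String) (g : List (List String)) (hc : ¬ code = "")
    (hP : ∀ row ∈ g, pvCols g ≤ row.length) :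
    get_sequence_alt code g =
      (pvPl code.toList "A").foldl (fun seqs SE =>
        seqs.flatMap (fun s =>
          (pvAllShortest ((pvLocOf g).getD SE.1 (0, 0)) ((pvLocOf g).getD SE.2 (0, 0))
            (pvCellsOf g)).map (fun p => s ++ p))) [""] := by
  simp only [get_sequence_alt]
  rw [if_neg hc, pvColsB_eq g, pvBuildFold g hP]
  exact pvBConv (C := fun seqs prev cur =>
    seqs.flatMap (fun s =>
      (pvAllShortest ((pvLocOf g).getD prev (0, 0)) ((pvLocOf g).getD cur (0, 0))
        (pvCellsOf g)).map (fun p => s ++ p))) code.toList "A" [""]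

lemma pvPaths_eq (g : List (List String)) (start endP : Int × Int) :
    get_shortest_path start endP g = pvAllShortest start endP (pvCellsOf g) := by
  rw [gsp_eq_out g start endP, pvOut_char g endP start,
    pvAllShortest_spec (pvCells_char g) start endP]

-- ===== final assembly =====
lemma pvOuter_eq (code : String) (g : List (List String))
    (hpre : code = "" ∨ ∀ row ∈ g, (g.headD []).length ≤ row.length) :
    get_sequence code g = get_sequence_alt code g := by
  by_cases hcz : code = ""
  · subst hcz
    rw [pvA_canon "" g]
    rfl
  · have hP : ∀ row ∈ g, pvCols g ≤ row.length := hpre.resolve_left hcz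
    rw [pvA_canon code g, pvB_canon code g hcz hP]
    apply PySem.List.foldl_congr_mem
    intro acc SE _
    unfold pvComb
    rw [pvPaths_eq g ((pvItems g).foldl (pvItemStepS SE.1) (0, 0))
      ((pvItems g).foldl (pvItemStepS SE.2) (0, 0))]
    unfold pvLocOf
    rw [pvDictLast SE.1, pvDictLast SE.2]
    rfl

-- ===== VERDICT (by name: the statement is the Claim_ definition above) =====
theorem get_sequence_spec : Claim_equal_get_sequence := by
  intro code grid _ hpre
  show get_sequence code grid = get_sequence_alt code grid
  exact pvOuter_eq code grid hpre
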